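-- pv_equiv track=rewrite | github.com/olimiemma/ARC-Prize-2025-Kaggle-ARC-AGI-2-Benchmark- | arc_prize_2025_submission/kaggle_arc_solver_v3.py | move_largest_nonbg_to_topleft
-- ===== SOURCE A (Python) =====
-- from collections import deque
-- from typing import Any, Dict, List, Tuple, Optional
--
-- Grid = List[List[int]]
--
-- def dims(g: Grid) -> Tuple[int, int]:
--     return (len(g), len(g[0]) if g else 0)
--
-- def most_common_color(g: Grid) -> int:
--     freq: Dict[int, int] = {}
--     for row in g:
--         for v in row:
--             freq[v] = freq.get(v, 0) + 1
--     best = 0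
--     best_c = 0
--     for c, f in freq.items():
--         if f > best:
--             best = f
--             best_c = c
--     return best_c
--
-- def cc_label_color(g: Grid, target_color: int) -> List[List[int]]:
--     h, w = dims(g)
--     labels = [[-1 for _ in range(w)] for _ in range(h)]
--     comp_id = 0
--     for r in range(h):
--         for c in range(w):
--             if g[r][c] == target_color and labels[r][c] == -1:
--                 q = deque()
--                 q.append((r, c))
--                 labels[r][c] = comp_id
--                 while q:
--                     rr, cc = q.popleft()
--                     for dr, dc in ((1,0),(-1,0),(0,1),(0,-1)):
--                         nr, nc = rr + dr, cc + dc
--                         if 0 <= nr < h and 0 <= nc < w and labels[nr][nc] == -1 and g[nr][nc] == target_color: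
--                             labels[nr][nc] = comp_id
--                             q.append((nr, nc))
--                 comp_id += 1
--     return labels
--
-- def largest_nonbg_component_bbox(g: Grid) -> Optional[Tuple[int,int,int,int]]:
--     h, w = dims(g)
--     bg = most_common_color(g)
--     best_size = 0
--     best_bbox: Optional[Tuple[int,int,int,int]] = None
--     colors: Dict[int, bool] = {}
--     for r in range(h):
--         for c in range(w):
--             colors[g[r][c]] = True
--     for color in colors.keys():
--         if color == bg:
--             continue
--         labels = cc_label_color(g, color)
--         sizes: Dict[int, int] = {}
--         bboxes: Dict[int, Tuple[int,int,int,int]] = {}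
--         for r in range(h):
--             for c in range(w):
--                 cid = labels[r][c]
--                 if cid >= 0:
--                     sizes[cid] = sizes.get(cid, 0) + 1
--                     if cid not in bboxes:
--                         bboxes[cid] = (r, c, r, c)
--                     else:
--                         r0, c0, r1, c1 = bboxes[cid]
--                         bboxes[cid] = (min(r0,r), min(c0,c), max(r1,r), max(c1,c))
--         for cid, sz in sizes.items():
--             if sz > best_size:
--                 best_size = sz
--                 best_bbox = bboxes[cid]
--     return best_bbox
--
-- def crop_bbox(g: Grid, bbox: Tuple[int,int,int,int]) -> Grid:
--     r0, c0, r1, c1 = bbox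
--     out: Grid = []
--     for r in range(r0, r1+1):
--         out.append(g[r][c0:c1+1])
--     return out
--
-- def move_largest_nonbg_to_topleft(g: Grid, fill: int) -> Grid:
--     bbox = largest_nonbg_component_bbox(g)
--     if bbox is None:
--         h, w = dims(g)
--         return [[fill for _ in range(w)] for _ in range(h)]
--     cropped = crop_bbox(g, bbox)
--     ch, cw = dims(cropped)
--     h, w = dims(g)
--     out: Grid = [[fill for _ in range(w)] for _ in range(h)]
--     for r in range(min(ch, h)):
--         for c in range(min(cw, w)):
--             out[r][c] = cropped[r][c]
--     return out
-- ===== SOURCE B (Python) =====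
-- from collections import Counter
--
--
-- def move_largest_nonbg_to_topleft(g, fill):
--     h = len(g)
--     w = len(g[0]) if g else 0
--     cnt = Counter(v for row in g for v in row)
--     bg = max(cnt, key=cnt.get, default=0)
--     cells = [(i, j) for i in range(h) for j in range(w)]
--     vis = set()
--     groups = {}  # colour -> [(size, bbox)] in seed (raster) order
--     for i, j in cells:
--         col = g[i][j]
--         if col == bg or (i, j) in vis:
--             continue
--         # grow the whole component once, scanning the growing member list
--         vis.add((i, j))
--         members = [(i, j)]
--         k = 0
--         while k < len(members):
--             x, y = members[k]
--             k += 1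
--             for nb in ((x + 1, y), (x - 1, y), (x, y + 1), (x, y - 1)):
--                 if 0 <= nb[0] < h and 0 <= nb[1] < w and nb not in vis and g[nb[0]][nb[1]] == col:
--                     vis.add(nb)
--                     members.append(nb)
--         box = (min(a for a, _ in members), min(b for _, b in members),
--                max(a for a, _ in members), max(b for _, b in members))
--         groups.setdefault(col, []).append((len(members), box))
--     top, winner = 0, None
--     for entries in groups.values():
--         for sz, box in entries:
--             if sz > top:
--                 top, winner = sz, box
--     if winner is None:
--         return [[fill] * w for _ in range(h)]
--     r0, c0, r1, c1 = winner
--     return [[g[r0 + u][c0 + v] if u <= r1 - r0 and v <= c1 - c0 else fill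
--              for v in range(w)] for u in range(h)]
-- ===== Notes on version B (the rewrite author's own statement) =====
-- stated objective: faster
-- what changed: One raster sweep over a flattened cell list grows every non-background component exactly once (global visited set, size and bbox taken from the grown member list, results grouped per colour and the winner picked afterwards in A's colour/seed order), replacing A's pipeline that, for every distinct colour, re-runs a full-grid BFS labelling pass plus a second full-grid sizes/bboxes scan; the background colour comes from a single Counter with a first-maximal max(), and the result grid is built directly by comprehension instead of allocate-then-mutate.
import Mathlib
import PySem

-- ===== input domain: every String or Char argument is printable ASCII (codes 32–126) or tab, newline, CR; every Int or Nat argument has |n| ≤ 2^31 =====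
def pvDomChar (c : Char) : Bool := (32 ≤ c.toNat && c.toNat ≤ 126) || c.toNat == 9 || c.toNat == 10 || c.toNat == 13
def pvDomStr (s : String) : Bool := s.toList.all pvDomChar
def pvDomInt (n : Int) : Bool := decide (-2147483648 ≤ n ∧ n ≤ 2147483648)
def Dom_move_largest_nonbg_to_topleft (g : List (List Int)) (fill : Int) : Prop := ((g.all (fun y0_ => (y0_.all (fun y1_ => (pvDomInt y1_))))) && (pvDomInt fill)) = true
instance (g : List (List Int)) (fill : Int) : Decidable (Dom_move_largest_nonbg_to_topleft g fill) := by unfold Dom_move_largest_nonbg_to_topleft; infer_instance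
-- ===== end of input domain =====

-- B replaces A's per-color relabel-then-rescan pipeline (a full BFS labelling pass plus a
-- full sizes/bboxes scan for EVERY distinct colour) by one raster sweep over a flattened cell
-- list that grows each component once (Counter-based background, direct output comprehension).

-- ===== PORT A =====

-- 2-D access helpers (indices are ℕ from range loops; defaults are never hit on admitted inputs)
def pvGet (g : List (List Int)) (r c : ℕ) : Int := (g.getD r []).getD c 0

def pvSet (m : List (List Int)) (r c : ℕ) (v : Int) : List (List Int) :=
  m.set r ((m.getD r []).set c v)

-- dims: (len(g), len(g[0]) if g else 0); headI [] = [] so headI.length covers the else.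
def pvDims (g : List (List Int)) : ℕ × ℕ := (g.length, g.headI.length)

def most_common_color (g : List (List Int)) : Int :=
  let freq : PySem.Dict Int Int :=
    g.foldl (fun freq row => row.foldl (fun freq v => freq.insert v (freq.getD v 0 + 1)) freq) PySem.Dict.empty
  (freq.items.foldl (fun (bb : Int × Int) cf => if cf.2 > bb.1 then (cf.2, cf.1) else bb) (0, 0)).2

-- while-loop of cc_label_color; fuel h*w+1 is always enough (each iteration pops one cell and
-- every pop was pushed; pushes ≤ 1 seed + h*w labelled cells), so the port equals the Python loop.
def pvBfsA (g : List (List Int)) (h w : ℕ) (target cid : Int) :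
    ℕ → List (List Int) × List (ℕ × ℕ) → List (List Int)
  | 0, st => st.1
  | fuel + 1, (labels, q) =>
    match q with
    | [] => labels
    | (rr, cc) :: q =>
      pvBfsA g h w target cid fuel
        ([((1 : Int), (0 : Int)), (-1, 0), (0, 1), (0, -1)].foldl
          (fun (st : List (List Int) × List (ℕ × ℕ)) d =>
            let nr : Int := (rr : Int) + d.1
            let nc : Int := (cc : Int) + d.2
            if 0 ≤ nr ∧ nr < (h : Int) ∧ 0 ≤ nc ∧ nc < (w : Int) ∧
               pvGet st.1 nr.toNat nc.toNat = -1 ∧ pvGet g nr.toNat nc.toNat = target then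
              (pvSet st.1 nr.toNat nc.toNat cid, st.2 ++ [(nr.toNat, nc.toNat)])
            else st)
          (labels, q))

def cc_label_color (g : List (List Int)) (target : Int) : List (List Int) :=
  let h := (pvDims g).1
  let w := (pvDims g).2
  ((List.range h).foldl (fun st r =>
    (List.range w).foldl (fun (st : List (List Int) × Int) c =>
      if pvGet g r c = target ∧ pvGet st.1 r c = -1 then
        (pvBfsA g h w target st.2 (h * w + 1) (pvSet st.1 r c st.2, [(r, c)]), st.2 + 1)
      else st) st)
    (List.replicate h (List.replicate w (-1 : Int)), 0)).1

def largest_nonbg_component_bbox (g : List (List Int)) : Option (ℕ × ℕ × ℕ × ℕ) :=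
  let h := (pvDims g).1
  let w := (pvDims g).2
  let bg := most_common_color g
  let colors : PySem.Dict Int Bool :=
    (List.range h).foldl (fun d r =>
      (List.range w).foldl (fun (d : PySem.Dict Int Bool) c => d.insert (pvGet g r c) true) d) PySem.Dict.empty
  (colors.keys.foldl (fun (st : ℕ × Option (ℕ × ℕ × ℕ × ℕ)) color =>
    if color = bg then st else
    let labels := cc_label_color g color
    let sb :=
      (List.range h).foldl (fun sb r =>
        (List.range w).foldl
          (fun (sb : PySem.Dict Int ℕ × PySem.Dict Int (ℕ × ℕ × ℕ × ℕ)) c =>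
            let cid := pvGet labels r c
            if cid ≥ 0 then
              (sb.1.insert cid (sb.1.getD cid 0 + 1),
               match sb.2.get? cid with
               | none => sb.2.insert cid (r, c, r, c)
               | some (r0, c0, r1, c1) => sb.2.insert cid (min r0 r, min c0 c, max r1 r, max c1 c))
            else sb) sb) (PySem.Dict.empty, PySem.Dict.empty)
    sb.1.items.foldl (fun (st : ℕ × Option (ℕ × ℕ × ℕ × ℕ)) cs =>
      if cs.2 > st.1 then (cs.2, some (sb.2.getD cs.1 (0, 0, 0, 0)))  -- bboxes[cid]: key always present
      else st) st) (0, none)).2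

def crop_bbox (g : List (List Int)) (bbox : ℕ × ℕ × ℕ × ℕ) : List (List Int) :=
  -- for r in range(r0, r1+1): out.append(g[r][c0:c1+1])
  (List.range' bbox.1 (bbox.2.2.1 + 1 - bbox.1)).foldl
    (fun out r => out ++ [((g.getD r []).drop bbox.2.1).take (bbox.2.2.2 + 1 - bbox.2.1)]) []

def move_largest_nonbg_to_topleft (g : List (List Int)) (fill : Int) : List (List Int) :=
  match largest_nonbg_component_bbox g with
  | none =>
      (List.range (pvDims g).1).map (fun _ => (List.range (pvDims g).2).map (fun _ => fill))
  | some bbox =>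
      let cropped := crop_bbox g bbox
      let ch := (pvDims cropped).1
      let cw := (pvDims cropped).2
      let h := (pvDims g).1
      let w := (pvDims g).2
      let out := (List.range h).map (fun _ => (List.range w).map (fun _ => fill))
      (List.range (min ch h)).foldl (fun out r =>
        (List.range (min cw w)).foldl (fun out c => pvSet out r c (pvGet cropped r c)) out) out

-- ===== PORT B =====

-- B's own cell accessor g[i][j] (indices are in range on admitted inputs)
def cellAt (G : List (List Int)) (i j : ℕ) : Int := ((G.getD i [])[j]?).getD 0

-- B's while-loop: Python's (members, k) worklist is represented as (members, members[k:]);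
-- fuel rows*cols+1 is always enough (each iteration pops one cell and every pushed cell was freshly
-- marked in vis, so pushes ≤ 1 seed + rows*cols marks), so the port equals the Python loop.
def grow (G : List (List Int)) (rows cols : ℕ) (col : Int) :
    ℕ → PySem.Set (ℕ × ℕ) × List (ℕ × ℕ) × List (ℕ × ℕ) → PySem.Set (ℕ × ℕ) × List (ℕ × ℕ)
  | 0, s => (s.1, s.2.1)
  | k + 1, (vis, members, rest) =>
    match rest with
    | [] => (vis, members)
    | (x, y) :: rest =>
      grow G rows cols col k
        ([((x : Int) + 1, (y : Int)), ((x : Int) - 1, (y : Int)),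
          ((x : Int), (y : Int) + 1), ((x : Int), (y : Int) - 1)].foldl
          (fun (s : PySem.Set (ℕ × ℕ) × List (ℕ × ℕ) × List (ℕ × ℕ)) nb =>
            if 0 ≤ nb.1 ∧ nb.1 < (rows : Int) ∧ 0 ≤ nb.2 ∧ nb.2 < (cols : Int) ∧
               ¬ (nb.1.toNat, nb.2.toNat) ∈ s.1 ∧ cellAt G nb.1.toNat nb.2.toNat = col then
              (PySem.Set.add s.1 (nb.1.toNat, nb.2.toNat),
               s.2.1 ++ [(nb.1.toNat, nb.2.toNat)], s.2.2 ++ [(nb.1.toNat, nb.2.toNat)])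
            else s)
          (vis, members, rest))

def move_largest_nonbg_to_topleft_alt (g : List (List Int)) (fill : Int) : List (List Int) :=
  let rows := g.length
  let cols := g.headI.length   -- len(g[0]) if g else 0
  -- cnt = Counter(v for row in g for v in row); bg = max(cnt, key=cnt.get, default=0)
  let cnt := PySem.Dict.counter (g.flatMap (fun row => row))
  let bg := PySem.List.maxD cnt.keys (fun v => cnt.getD v 0) 0
  let cells := (List.range rows).flatMap (fun i => (List.range cols).map (fun j => (i, j)))
  let final :=
    cells.foldl
      (fun (acc : PySem.Set (ℕ × ℕ) × PySem.Dict Int (List (ℕ × (ℕ × ℕ × ℕ × ℕ)))) cell =>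
        let col := cellAt g cell.1 cell.2
        if col = bg ∨ (cell.1, cell.2) ∈ acc.1 then acc else
        let res := grow g rows cols col (rows * cols + 1)
            (PySem.Set.add acc.1 (cell.1, cell.2), [(cell.1, cell.2)], [(cell.1, cell.2)])
        let members := res.2
        -- min/max of nonempty generators; members is never [] (it contains the seed)
        let box :=
          (((PySem.List.min? (members.map Prod.fst) (fun a => a)).getD 0),
           ((PySem.List.min? (members.map Prod.snd) (fun a => a)).getD 0),
           ((PySem.List.max? (members.map Prod.fst) (fun a => a)).getD 0),
           ((PySem.List.max? (members.map Prod.snd) (fun a => a)).getD 0))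
        (res.1, acc.2.insert col (acc.2.getD col [] ++ [(members.length, box)])))
      ((PySem.Set.empty : PySem.Set (ℕ × ℕ)), PySem.Dict.empty)
  let winner :=
    final.2.values.foldl (fun cur entries =>
      entries.foldl (fun (cur : ℕ × Option (ℕ × ℕ × ℕ × ℕ)) it =>
        if it.1 > cur.1 then (it.1, some it.2) else cur) cur) (0, none)
  match winner.2 with
  | none => (List.range rows).map (fun _ => PySem.List.pyRepeat [fill] (cols : Int))
  | some (top, lft, bot, rgt) =>
      -- u ≤ bot-top and v ≤ rgt-lft (top ≤ bot, lft ≤ rgt always)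
      (List.range rows).map (fun u =>
        (List.range cols).map (fun v =>
          if u ≤ bot - top ∧ v ≤ rgt - lft then cellAt g (top + u) (lft + v) else fill))

-- ===== PRECONDITION & SPEC =====
-- Pre_ excludes exactly the grids with a row shorter than the first row: on those A's
-- colour-collection scan indexes past the short row and raises IndexError (A never returns there).
def Pre_move_largest_nonbg_to_topleft (g : List (List Int)) (fill : Int) : Prop :=
  ∀ row ∈ g, g.headI.length ≤ row.length
instance (g : List (List Int)) (fill : Int) : Decidable (Pre_move_largest_nonbg_to_topleft g fill) := by
  unfold Pre_move_largest_nonbg_to_topleft; infer_instance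

def pvWitness_move_largest_nonbg_to_topleft : List (List Int) × Int := ([[0, 1], [0, 0]], 7)

def Spec_move_largest_nonbg_to_topleft (g : List (List Int)) (fill : Int) (out : List (List Int)) : Prop := out = move_largest_nonbg_to_topleft_alt g fill
instance (g : List (List Int)) (fill : Int) (out : List (List Int)) : Decidable (Spec_move_largest_nonbg_to_topleft g fill out) := by unfold Spec_move_largest_nonbg_to_topleft; infer_instance

-- ===== CLAIM (what is proved, stated in full; the proofs are below) =====
def Claim_equal_move_largest_nonbg_to_topleft : Prop := ∀ (g : List (List Int)) (fill : Int), Dom_move_largest_nonbg_to_topleft g fill → Pre_move_largest_nonbg_to_topleft g fill → Spec_move_largest_nonbg_to_topleft g fill (move_largest_nonbg_to_topleft g fill)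

-- ===== LEMMAS AND PROOFS =====

-- ---------- proof-side abbreviations ----------
def pvH (g : List (List Int)) : ℕ := g.length
def pvW (g : List (List Int)) : ℕ := g.headI.length
def pvCells (g : List (List Int)) : List (ℕ × ℕ) :=
  (List.range (pvH g)).flatMap (fun r => (List.range (pvW g)).map (fun c => (r, c)))
def pvPreL (g : List (List Int)) (n : ℕ) : List (ℕ × ℕ) := (pvCells g).take n
def pvLab0 (g : List (List Int)) : List (List Int) :=
  List.replicate (pvH g) (List.replicate (pvW g) (-1 : Int))
def pvWf (g m : List (List Int)) : Prop :=
  m.length = pvH g ∧ ∀ row ∈ m, row.length = pvW g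

def pvStA (g : List (List Int)) (X : Int) (st : List (List Int) × Int) (p : ℕ × ℕ) :
    List (List Int) × Int :=
  if pvGet g p.1 p.2 = X ∧ pvGet st.1 p.1 p.2 = -1 then
    (pvBfsA g (pvH g) (pvW g) X st.2 (pvH g * pvW g + 1) (pvSet st.1 p.1 p.2 st.2, [p]), st.2 + 1)
  else st
def pvA (g : List (List Int)) (X : Int) (n : ℕ) : List (List Int) × Int :=
  (pvPreL g n).foldl (pvStA g X) (pvLab0 g, 0)

abbrev PVStB := PySem.Set (ℕ × ℕ) × PySem.Dict Int (List (ℕ × (ℕ × ℕ × ℕ × ℕ)))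
def pvStB (g : List (List Int)) (bg : Int) (st : PVStB) (p : ℕ × ℕ) : PVStB :=
  let color := pvGet g p.1 p.2
  if color = bg ∨ (p.1, p.2) ∈ st.1 then st else
  let res := grow g (pvH g) (pvW g) color (pvH g * pvW g + 1)
      (PySem.Set.add st.1 (p.1, p.2), [(p.1, p.2)], [(p.1, p.2)])
  let todo := res.2
  let bbox : ℕ × ℕ × ℕ × ℕ :=
    (((PySem.List.min? (todo.map Prod.fst) (fun x => x)).getD 0),
     ((PySem.List.min? (todo.map Prod.snd) (fun x => x)).getD 0),
     ((PySem.List.max? (todo.map Prod.fst) (fun x => x)).getD 0),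
     ((PySem.List.max? (todo.map Prod.snd) (fun x => x)).getD 0))
  (res.1, st.2.insert color (st.2.getD color [] ++ [(todo.length, bbox)]))
def pvB (g : List (List Int)) (bg : Int) (n : ℕ) : PVStB :=
  (pvPreL g n).foldl (pvStB g bg) ((PySem.Set.empty : PySem.Set (ℕ × ℕ)), PySem.Dict.empty)

def pvCls (g lab : List (List Int)) (j : Int) : List (ℕ × ℕ) :=
  (pvCells g).filter (fun p => pvGet lab p.1 p.2 = j)
def pvBbOf : List (ℕ × ℕ) → ℕ × ℕ × ℕ × ℕ
  | [] => (0, 0, 0, 0)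
  | x :: t => ((t.map Prod.fst).foldl min x.1, (t.map Prod.snd).foldl min x.2,
               (t.map Prod.fst).foldl max x.1, (t.map Prod.snd).foldl max x.2)
def pvEntry (g lab : List (List Int)) (j : Int) : ℕ × (ℕ × ℕ × ℕ × ℕ) :=
  ((pvCls g lab j).length, pvBbOf (pvCls g lab j))
def pvFIdx (g lab : List (List Int)) (j : Int) : ℕ :=
  (pvCells g).findIdx (fun p => pvGet lab p.1 p.2 = j)

def pvRel (g : List (List Int)) (X : Int) (lab : List (List Int)) (seen : PySem.Set (ℕ × ℕ)) : Prop :=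
  pvWf g lab ∧ ∀ r c, r < pvH g → c < pvW g →
    (pvGet lab r c ≠ -1 ↔ ((r, c) ∈ seen ∧ pvGet g r c = X))

-- ---------- basic 2-D lemmas ----------
lemma pvWf_lab0 (g : List (List Int)) : pvWf g (pvLab0 g) := by
  constructor
  · simp [pvLab0]
  · intro row hrow
    simp only [pvLab0, List.mem_replicate] at hrow
    simp [hrow.2]

lemma pvGet_lab0' (g : List (List Int)) (r c : ℕ) (hr : r < pvH g) (hc : c < pvW g) :
    pvGet (pvLab0 g) r c = -1 := by
  simp [pvGet, pvLab0, List.getD_eq_getElem?_getD, hr, hc]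

lemma pvWf_pvSet (g m : List (List Int)) (hm : pvWf g m) (r c : ℕ) (v : Int) :
    pvWf g (pvSet m r c v) := by
  constructor
  · simp [pvSet, hm.1]
  · intro row hrow
    by_cases hr : r < m.length
    · rcases List.mem_or_eq_of_mem_set hrow with h | h
      · exact hm.2 _ h
      · subst h
        simp only [List.length_set]
        have hm' : m.getD r [] = m[r] := by
          simp [List.getD_eq_getElem?_getD, List.getElem?_eq_getElem hr]
        rw [hm']
        exact hm.2 _ (List.getElem_mem hr)
    · rw [pvSet, List.set_eq_of_length_le (Nat.le_of_not_lt hr)] at hrow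
      exact hm.2 _ hrow

lemma pvGet_pvSet_same (g m : List (List Int)) (hm : pvWf g m) (r c : ℕ)
    (hr : r < pvH g) (hc : c < pvW g) (v : Int) : pvGet (pvSet m r c v) r c = v := by
  have hr' : r < m.length := hm.1 ▸ hr
  have hrow : m.getD r [] = m[r] := by
    simp [List.getD_eq_getElem?_getD, List.getElem?_eq_getElem hr']
  have hc' : c < (m.getD r []).length := by
    rw [hrow, hm.2 _ (List.getElem_mem hr')]; exact hc
  simp only [pvGet, pvSet, List.getD_eq_getElem?_getD]
  rw [List.getElem?_set_self hr', Option.getD_some,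
    List.getElem?_set_self (by simpa using hc'), Option.getD_some]

lemma pvGet_pvSet_ne (m : List (List Int)) (r c r' c' : ℕ) (hne : (r', c') ≠ (r, c)) (v : Int) :
    pvGet (pvSet m r c v) r' c' = pvGet m r' c' := by
  by_cases hrr : r' = r
  · subst hrr
    have hcc : c' ≠ c := fun h => hne (by simp [h])
    by_cases hr : r' < m.length
    · simp only [pvGet, pvSet, List.getD_eq_getElem?_getD]
      rw [List.getElem?_set_self hr, Option.getD_some,
        List.getElem?_set_ne (Ne.symm hcc), List.getElem?_eq_getElem hr, Option.getD_some]
    · rw [pvSet, List.set_eq_of_length_le (Nat.le_of_not_lt hr)]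
  · simp only [pvGet, pvSet, List.getD_eq_getElem?_getD]
    rw [List.getElem?_set_ne (Ne.symm hrr)]

lemma pvWf_foldSet (g : List (List Int)) (cid : Int) (Δ : List (ℕ × ℕ)) :
    ∀ lab, pvWf g lab → pvWf g (Δ.foldl (fun L p => pvSet L p.1 p.2 cid) lab) := by
  induction Δ with
  | nil => intro lab h; exact h
  | cons p t ih =>
    intro lab h
    exact ih _ (pvWf_pvSet g lab h p.1 p.2 cid)

lemma pvGet_foldSet (g : List (List Int)) (cid : Int) (Δ : List (ℕ × ℕ))
    (hΔ : ∀ p ∈ Δ, p.1 < pvH g ∧ p.2 < pvW g) :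
    ∀ lab, pvWf g lab → ∀ r c,
      pvGet (Δ.foldl (fun L p => pvSet L p.1 p.2 cid) lab) r c =
        if (r, c) ∈ Δ then cid else pvGet lab r c := by
  induction Δ with
  | nil => intro lab _ r c; simp
  | cons p t ih =>
    obtain ⟨pr, pc⟩ := p
    intro lab hwf r c
    have hp := hΔ (pr, pc) (by simp)
    have ht : ∀ q ∈ t, q.1 < pvH g ∧ q.2 < pvW g := fun q hq => hΔ q (by simp [hq])
    rw [List.foldl_cons, ih ht _ (pvWf_pvSet g lab hwf pr pc cid) r c]
    by_cases hmem : (r, c) ∈ t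
    · rw [if_pos hmem, if_pos (by simp [hmem])]
    · by_cases hpe : (r, c) = (pr, pc)
      · obtain ⟨h1, h2⟩ := Prod.mk.injEq .. ▸ hpe
        rcases Prod.mk.injEq r c pr pc ▸ hpe with h
        have hr : r = pr := by simpa using congrArg Prod.fst hpe
        have hc : c = pc := by simpa using congrArg Prod.snd hpe
        subst hr; subst hc
        rw [if_neg hmem, if_pos (by simp)]
        exact pvGet_pvSet_same g lab hwf r c (by simpa using hp.1) (by simpa using hp.2) cid
      · rw [if_neg hmem, if_neg (by simp [hpe, hmem])]
        exact pvGet_pvSet_ne lab pr pc r c hpe cid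

lemma foldl_nested {σ : Type} (F : σ → (ℕ × ℕ) → σ) (h w : ℕ) (init : σ) :
    (List.range h).foldl (fun s r => (List.range w).foldl (fun s c => F s (r, c)) s) init =
      ((List.range h).flatMap (fun r => (List.range w).map (fun c => (r, c)))).foldl F init := by
  rw [List.foldl_flatMap]
  congr 1
  funext s r
  rw [List.foldl_map]

lemma pvCells_mem (g : List (List Int)) (p : ℕ × ℕ) :
    p ∈ pvCells g ↔ p.1 < pvH g ∧ p.2 < pvW g := by
  obtain ⟨r, c⟩ := p
  simp [pvCells, List.mem_flatMap]

lemma pvCells_nodup (g : List (List Int)) : (pvCells g).Nodup := by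
  rw [pvCells, List.nodup_flatMap]
  constructor
  · intro r _
    exact List.nodup_range.map (fun a b h => by simpa using congrArg Prod.snd h)
  · apply List.Pairwise.imp ?_ (List.pairwise_lt_range)
    intro a b hab
    simp only [Function.onFun, List.disjoint_left, List.mem_map]
    rintro x ⟨c, _, rfl⟩ ⟨c', _, h⟩
    exact absurd (by simpa using (congrArg Prod.fst h).symm) (Nat.ne_of_lt hab)

lemma pv_not_mem_take {α : Type} (l : List α) (hl : l.Nodup) (n : ℕ) (hn : n < l.length) :
    l[n] ∉ l.take n := by
  intro hmem
  have hdisj := List.disjoint_take_drop (m := n) (n := n) hl le_rfl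
  have hdrop : l[n] ∈ l.drop n := by
    rw [List.drop_eq_getElem_cons hn]
    exact List.mem_cons_self
  exact hdisj hmem hdrop

lemma pvPreL_succ (g : List (List Int)) (n : ℕ) (hn : n < (pvCells g).length) :
    pvPreL g (n + 1) = pvPreL g n ++ [(pvCells g)[n]] := by
  rw [pvPreL, pvPreL, List.take_add_one, List.getElem?_eq_getElem hn]
  rfl

-- unfold lemmas for the BFS loops
lemma pvBfsA_zero (g : List (List Int)) (h w : ℕ) (X cid : Int) (st : List (List Int) × List (ℕ × ℕ)) :
    pvBfsA g h w X cid 0 st = st.1 := rfl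
lemma pvBfsA_nil (g : List (List Int)) (h w : ℕ) (X cid : Int) (fuel : ℕ) (lab : List (List Int)) :
    pvBfsA g h w X cid (fuel + 1) (lab, []) = lab := rfl
lemma grow_zero (g : List (List Int)) (h w : ℕ) (X : Int) (st : PySem.Set (ℕ × ℕ) × List (ℕ × ℕ) × List (ℕ × ℕ)) :
    grow g h w X 0 st = (st.1, st.2.1) := rfl
lemma grow_nil (g : List (List Int)) (h w : ℕ) (X : Int) (fuel : ℕ) (seen : PySem.Set (ℕ × ℕ)) (todo : List (ℕ × ℕ)) :
    grow g h w X (fuel + 1) (seen, todo, []) = (seen, todo) := rfl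

def pvNbrs (rr cc : ℕ) : List (Int × Int) :=
  [((rr : Int) + 1, (cc : Int)), ((rr : Int) - 1, (cc : Int)),
   ((rr : Int), (cc : Int) + 1), ((rr : Int), (cc : Int) - 1)]

def pvStepA (g : List (List Int)) (X cid : Int)
    (st : List (List Int) × List (ℕ × ℕ)) (n : Int × Int) : List (List Int) × List (ℕ × ℕ) :=
  if 0 ≤ n.1 ∧ n.1 < (pvH g : Int) ∧ 0 ≤ n.2 ∧ n.2 < (pvW g : Int) ∧
     pvGet st.1 n.1.toNat n.2.toNat = -1 ∧ pvGet g n.1.toNat n.2.toNat = X then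
    (pvSet st.1 n.1.toNat n.2.toNat cid, st.2 ++ [(n.1.toNat, n.2.toNat)])
  else st

def pvStepB (g : List (List Int)) (X : Int)
    (st : PySem.Set (ℕ × ℕ) × List (ℕ × ℕ) × List (ℕ × ℕ)) (n : Int × Int) :
    PySem.Set (ℕ × ℕ) × List (ℕ × ℕ) × List (ℕ × ℕ) :=
  if 0 ≤ n.1 ∧ n.1 < (pvH g : Int) ∧ 0 ≤ n.2 ∧ n.2 < (pvW g : Int) ∧
     ¬ (n.1.toNat, n.2.toNat) ∈ st.1 ∧ pvGet g n.1.toNat n.2.toNat = X then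
    (PySem.Set.add st.1 (n.1.toNat, n.2.toNat),
     st.2.1 ++ [(n.1.toNat, n.2.toNat)], st.2.2 ++ [(n.1.toNat, n.2.toNat)])
  else st

lemma pvBfsA_succ_cons (g : List (List Int)) (X cid : Int) (fuel : ℕ)
    (lab : List (List Int)) (rr cc : ℕ) (q : List (ℕ × ℕ)) :
    pvBfsA g (pvH g) (pvW g) X cid (fuel + 1) (lab, (rr, cc) :: q) =
      pvBfsA g (pvH g) (pvW g) X cid fuel ((pvNbrs rr cc).foldl (pvStepA g X cid) (lab, q)) := by
  have : (pvNbrs rr cc).foldl (pvStepA g X cid) (lab, q) =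
      [((1 : Int), (0 : Int)), (-1, 0), (0, 1), (0, -1)].foldl
        (fun (st : List (List Int) × List (ℕ × ℕ)) d =>
          pvStepA g X cid st ((rr : Int) + d.1, (cc : Int) + d.2)) (lab, q) := by
    simp only [pvNbrs, List.foldl_cons, List.foldl_nil]
    norm_num [sub_eq_add_neg]
  rw [this]
  rfl

lemma grow_succ_cons (g : List (List Int)) (X : Int) (fuel : ℕ)
    (seen : PySem.Set (ℕ × ℕ)) (todo : List (ℕ × ℕ)) (rr cc : ℕ) (q : List (ℕ × ℕ)) :
    grow g (pvH g) (pvW g) X (fuel + 1) (seen, todo, (rr, cc) :: q) =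
      grow g (pvH g) (pvW g) X fuel ((pvNbrs rr cc).foldl (pvStepB g X) (seen, todo, q)) := rfl

-- ---------- lockstep BFS ----------
lemma pvLockstepFold (g : List (List Int)) (X cid : Int) (hcid : 0 ≤ cid) :
    ∀ (ns : List (Int × Int)) (lab : List (List Int)) (seen : PySem.Set (ℕ × ℕ))
      (todo q : List (ℕ × ℕ)),
      pvRel g X lab seen → (seen : List (ℕ × ℕ)).Nodup →
      ∃ δ : List (ℕ × ℕ),
        ns.foldl (pvStepA g X cid) (lab, q) =
            (δ.foldl (fun L p => pvSet L p.1 p.2 cid) lab, q ++ δ) ∧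
        ns.foldl (pvStepB g X) (seen, todo, q) = (seen ++ δ, todo ++ δ, q ++ δ) ∧
        δ.Nodup ∧ (∀ p ∈ δ, p.1 < pvH g ∧ p.2 < pvW g ∧ pvGet g p.1 p.2 = X ∧ p ∉ seen) ∧
        pvRel g X (δ.foldl (fun L p => pvSet L p.1 p.2 cid) lab) (seen ++ δ) ∧
        ((seen ++ δ) : List (ℕ × ℕ)).Nodup := by
  intro ns
  induction ns with
  | nil =>
    intro lab seen todo q hrel hnd
    exact ⟨[], by simp, by simp, by simp, by simp, by simpa using hrel, by simpa using hnd⟩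
  | cons n ns ih =>
    intro lab seen todo q hrel hnd
    by_cases hA : 0 ≤ n.1 ∧ n.1 < (pvH g : Int) ∧ 0 ≤ n.2 ∧ n.2 < (pvW g : Int) ∧
        pvGet lab n.1.toNat n.2.toNat = -1 ∧ pvGet g n.1.toNat n.2.toNat = X
    · obtain ⟨h1, h2, h3, h4, h5, h6⟩ := hA
      have hrn : n.1.toNat < pvH g := by omega
      have hcn : n.2.toNat < pvW g := by omega
      have hnotmem : (n.1.toNat, n.2.toNat) ∉ seen := by
        intro hmem
        exact absurd ((hrel.2 _ _ hrn hcn).mpr ⟨hmem, h6⟩) (by simpa using h5)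
      have hstepA : pvStepA g X cid (lab, q) n =
          (pvSet lab n.1.toNat n.2.toNat cid, q ++ [(n.1.toNat, n.2.toNat)]) := by
        rw [pvStepA, if_pos ⟨h1, h2, h3, h4, h5, h6⟩]
      have hstepB : pvStepB g X (seen, todo, q) n =
          (seen ++ [(n.1.toNat, n.2.toNat)], todo ++ [(n.1.toNat, n.2.toNat)],
           q ++ [(n.1.toNat, n.2.toNat)]) := by
        rw [pvStepB, if_pos ⟨h1, h2, h3, h4, hnotmem, h6⟩]
        rw [PySem.Set.add_of_not_mem hnotmem]
      have hwf' := pvWf_pvSet g lab hrel.1 n.1.toNat n.2.toNat cid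
      have hrel' : pvRel g X (pvSet lab n.1.toNat n.2.toNat cid)
          (seen ++ [(n.1.toNat, n.2.toNat)]) := by
        refine ⟨hwf', ?_⟩
        intro r c hr hc
        by_cases hp : (r, c) = (n.1.toNat, n.2.toNat)
        · have h1' : r = n.1.toNat := by simpa using congrArg Prod.fst hp
          have h2' : c = n.2.toNat := by simpa using congrArg Prod.snd hp
          subst h1'; subst h2'
          rw [pvGet_pvSet_same g lab hrel.1 _ _ hrn hcn cid]
          have hcne : cid ≠ -1 := by omega
          simp [hcne, h6]
        · rw [pvGet_pvSet_ne lab _ _ r c hp cid]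
          rw [hrel.2 r c hr hc]
          constructor
          · rintro ⟨hm, hx⟩; exact ⟨List.mem_append_left _ hm, hx⟩
          · rintro ⟨hm, hx⟩
            rcases List.mem_append.mp hm with h | h
            · exact ⟨h, hx⟩
            · exact absurd (by simpa using h) hp
      have hnd' : ((seen ++ [(n.1.toNat, n.2.toNat)]) : List (ℕ × ℕ)).Nodup := by
        refine List.Nodup.append hnd (by simp) ?_
        intro a ha hb
        rw [List.mem_singleton] at hb
        subst hb
        exact hnotmem ha
      obtain ⟨δ, hAres, hBres, hδnd, hδmem, hrelres, hndres⟩ :=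
        ih (pvSet lab n.1.toNat n.2.toNat cid) (seen ++ [(n.1.toNat, n.2.toNat)])
          (todo ++ [(n.1.toNat, n.2.toNat)]) (q ++ [(n.1.toNat, n.2.toNat)]) hrel' hnd'
      refine ⟨(n.1.toNat, n.2.toNat) :: δ, ?_, ?_, ?_, ?_, ?_, ?_⟩
      · rw [List.foldl_cons, hstepA, hAres]
        simp
      · rw [List.foldl_cons, hstepB, hBres]
        simp
      · refine List.nodup_cons.mpr ⟨?_, hδnd⟩
        intro hmem
        exact (hδmem _ hmem).2.2.2 (by simp)
      · intro p hp
        rcases List.mem_cons.mp hp with h | h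
        · subst h; exact ⟨hrn, hcn, h6, hnotmem⟩
        · have := hδmem p h
          exact ⟨this.1, this.2.1, this.2.2.1, fun hc => this.2.2.2 (by simp [hc])⟩
      · simpa using hrelres
      · simpa using hndres
    · have hB : ¬ (0 ≤ n.1 ∧ n.1 < (pvH g : Int) ∧ 0 ≤ n.2 ∧ n.2 < (pvW g : Int) ∧
          ¬ (n.1.toNat, n.2.toNat) ∈ seen ∧ pvGet g n.1.toNat n.2.toNat = X) := by
        intro ⟨h1, h2, h3, h4, h5, h6⟩
        refine hA ⟨h1, h2, h3, h4, ?_, h6⟩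
        have hrn : n.1.toNat < pvH g := by omega
        have hcn : n.2.toNat < pvW g := by omega
        by_contra hne
        exact h5 ((hrel.2 _ _ hrn hcn).mp hne).1
      rw [List.foldl_cons, List.foldl_cons, pvStepA, if_neg hA, pvStepB, if_neg hB]
      exact ih lab seen todo q hrel hnd

lemma pvLockstep (g : List (List Int)) (X cid : Int) (hcid : 0 ≤ cid) :
    ∀ (fuel : ℕ) (lab : List (List Int)) (seen : PySem.Set (ℕ × ℕ)) (todo q : List (ℕ × ℕ)),
      pvRel g X lab seen → (seen : List (ℕ × ℕ)).Nodup →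
      ∃ Δ : List (ℕ × ℕ),
        pvBfsA g (pvH g) (pvW g) X cid fuel (lab, q) =
            Δ.foldl (fun L p => pvSet L p.1 p.2 cid) lab ∧
        grow g (pvH g) (pvW g) X fuel (seen, todo, q) = (seen ++ Δ, todo ++ Δ) ∧
        Δ.Nodup ∧
        (∀ p ∈ Δ, p.1 < pvH g ∧ p.2 < pvW g ∧ pvGet g p.1 p.2 = X ∧ p ∉ seen) := by
  intro fuel
  induction fuel with
  | zero =>
    intro lab seen todo q hrel hnd
    exact ⟨[], by simp [pvBfsA_zero], by simp [grow_zero], by simp, by simp⟩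
  | succ fuel ih =>
    intro lab seen todo q hrel hnd
    match q with
    | [] =>
      exact ⟨[], by simp [pvBfsA_nil], by simp [grow_nil], by simp, by simp⟩
    | (rr, cc) :: q =>
      obtain ⟨δ, hAres, hBres, hδnd, hδmem, hrel', hnd'⟩ :=
        pvLockstepFold g X cid hcid (pvNbrs rr cc) lab seen todo q hrel hnd
      obtain ⟨Δ, hA2, hB2, hΔnd, hΔmem⟩ :=
        ih (δ.foldl (fun L p => pvSet L p.1 p.2 cid) lab) (seen ++ δ) (todo ++ δ) (q ++ δ)
          hrel' hnd'
      refine ⟨δ ++ Δ, ?_, ?_, ?_, ?_⟩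
      · rw [pvBfsA_succ_cons, hAres, hA2, List.foldl_append]
      · rw [grow_succ_cons, hBres, hB2]
        simp
      · refine List.Nodup.append hδnd hΔnd ?_
        intro p hp hP
        exact (hΔmem p hP).2.2.2 (by simp [hp])
      · intro p hp
        rcases List.mem_append.mp hp with h | h
        · exact hδmem p h
        · have := hΔmem p h
          exact ⟨this.1, this.2.1, this.2.2.1, fun hc => this.2.2.2 (by simp [hc])⟩

-- ---------- port bridges ----------
lemma cc_label_color_eq (g : List (List Int)) (X : Int) :
    cc_label_color g X = (pvA g X (pvCells g).length).1 := by
  have h1 : cc_label_color g X =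
      ((List.range (pvH g)).foldl (fun st r =>
        (List.range (pvW g)).foldl (fun st c => pvStA g X st (r, c)) st) (pvLab0 g, 0)).1 := rfl
  rw [h1, foldl_nested (pvStA g X) (pvH g) (pvW g), pvA, pvPreL, List.take_length]
  rfl

lemma scanB_eq (g : List (List Int)) (bg : Int) :
    ((List.range g.length).flatMap (fun i => (List.range g.headI.length).map (fun j => (i, j)))).foldl
      (fun (acc : PVStB) cell =>
        let col := cellAt g cell.1 cell.2
        if col = bg ∨ (cell.1, cell.2) ∈ acc.1 then acc else
        let res := grow g g.length g.headI.length col (g.length * g.headI.length + 1)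
            (PySem.Set.add acc.1 (cell.1, cell.2), [(cell.1, cell.2)], [(cell.1, cell.2)])
        let members := res.2
        let box : ℕ × ℕ × ℕ × ℕ :=
          (((PySem.List.min? (members.map Prod.fst) (fun a => a)).getD 0),
           ((PySem.List.min? (members.map Prod.snd) (fun a => a)).getD 0),
           ((PySem.List.max? (members.map Prod.fst) (fun a => a)).getD 0),
           ((PySem.List.max? (members.map Prod.snd) (fun a => a)).getD 0))
        (res.1, acc.2.insert col (acc.2.getD col [] ++ [(members.length, box)])))
      ((PySem.Set.empty : PySem.Set (ℕ × ℕ)), PySem.Dict.empty) =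
    pvB g bg (pvCells g).length := by
  rw [pvB, pvPreL, List.take_length]
  rfl


-- ---------- small helper lemmas ----------
lemma pvFindIdx_congr {α : Type} (p q : α → Bool) :
    ∀ l : List α, (∀ x ∈ l, p x = q x) → l.findIdx p = l.findIdx q := by
  intro l
  induction l with
  | nil => intro _; rfl
  | cons x xs ih =>
    intro h
    rw [List.findIdx_cons, List.findIdx_cons, h x (by simp), ih (fun y hy => h y (by simp [hy]))]

lemma pvFoldlMin_perm (x x' : ℕ) (l l' : List ℕ) (hmem : ∀ a, a ∈ x :: l ↔ a ∈ x' :: l') :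
    l.foldl min x = l'.foldl min x' := by
  have h1 := PySem.List.min?_id_cons x l
  have h2 := PySem.List.min?_id_cons x' l'
  have m1 := PySem.List.min?_mem h1
  have m2 := PySem.List.min?_mem h2
  have i1 := PySem.List.min?_isMin h1
  have i2 := PySem.List.min?_isMin h2
  exact le_antisymm (i1 _ ((hmem _).mpr m2)) (i2 _ ((hmem _).mp m1))

lemma pvFoldlMax_perm (x x' : ℕ) (l l' : List ℕ) (hmem : ∀ a, a ∈ x :: l ↔ a ∈ x' :: l') :
    l.foldl max x = l'.foldl max x' := by
  have h1 := PySem.List.max?_id_cons x l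
  have h2 := PySem.List.max?_id_cons x' l'
  have m1 := PySem.List.max?_mem h1
  have m2 := PySem.List.max?_mem h2
  have i1 := PySem.List.max?_isMax h1
  have i2 := PySem.List.max?_isMax h2
  exact le_antisymm (i2 _ ((hmem _).mp m1)) (i1 _ ((hmem _).mpr m2))

lemma pvBbOf_perm (l l' : List (ℕ × ℕ)) (h : l.Perm l') :
    ∀ (_ : l ≠ []), pvBbOf l = pvBbOf l' := by
  intro hne
  match l, l' with
  | [], _ => exact absurd rfl hne
  | x :: t, [] => exact absurd (List.Perm.symm h) (by simp)
  | x :: t, y :: s =>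
    have hf : ((x :: t).map Prod.fst).Perm ((y :: s).map Prod.fst) := h.map _
    have hs : ((x :: t).map Prod.snd).Perm ((y :: s).map Prod.snd) := h.map _
    have hmf : ∀ a, a ∈ x.1 :: t.map Prod.fst ↔ a ∈ y.1 :: s.map Prod.fst := by
      intro a; constructor
      · intro ha; exact hf.mem_iff.mp (by simpa using ha)
      · intro ha; exact (by simpa using hf.mem_iff.mpr (by simpa using ha))
    have hms : ∀ a, a ∈ x.2 :: t.map Prod.snd ↔ a ∈ y.2 :: s.map Prod.snd := by
      intro a; constructor
      · intro ha; exact hs.mem_iff.mp (by simpa using ha)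
      · intro ha; exact (by simpa using hs.mem_iff.mpr (by simpa using ha))
    show (_, _, _, _) = (_, _, _, _)
    rw [pvFoldlMin_perm _ _ _ _ hmf, pvFoldlMin_perm _ _ _ _ hms,
      pvFoldlMax_perm _ _ _ _ hmf, pvFoldlMax_perm _ _ _ _ hms]

lemma pvDedup_append_singleton (l : List Int) (x : Int) :
    PySem.List.dedup (l ++ [x]) =
      if x ∈ l then PySem.List.dedup l else PySem.List.dedup l ++ [x] := by
  rw [PySem.List.dedup_eq_ofList, PySem.List.dedup_eq_ofList, PySem.Set.ofList_append_singleton,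
    PySem.Set.add_eq_ite]
  by_cases hx : x ∈ l
  · rw [if_pos (by rwa [PySem.Set.mem_ofList]), if_pos hx]
  · rw [if_neg (by rwa [PySem.Set.mem_ofList]), if_neg hx]

lemma pvMem_take_of_lt {α : Type} (l : List α) (i n : ℕ) (hi : i < n) (hn : i < l.length) :
    l[i] ∈ l.take n := by
  rw [List.mem_take_iff_getElem]
  exact ⟨i, by omega, rfl⟩

lemma pvFIdx_spec (g lab : List (List Int)) (j : Int) (h : pvFIdx g lab j < (pvCells g).length) :
    pvGet lab ((pvCells g)[pvFIdx g lab j]'h).1 ((pvCells g)[pvFIdx g lab j]'h).2 = j := by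
  have hw : (pvCells g).findIdx (fun p => pvGet lab p.1 p.2 = j) < (pvCells g).length := by
    simpa [pvFIdx] using h
  have := List.findIdx_getElem (w := hw)
  simp only [decide_eq_true_eq] at this
  simpa [pvFIdx] using this

lemma pvFIdx_not (g lab : List (List Int)) (j : Int) (i : ℕ) (hi : i < pvFIdx g lab j)
    (hlen : i < (pvCells g).length) :
    ¬ pvGet lab ((pvCells g)[i]'hlen).1 ((pvCells g)[i]'hlen).2 = j := by
  have := List.not_of_lt_findIdx (p := fun p => pvGet lab p.1 p.2 = j) (xs := pvCells g)
    (i := i) (by simpa [pvFIdx] using hi)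
  simpa using this

lemma pvFIdx_spec_at (g lab : List (List Int)) (j : Int) (i : ℕ) (hi : i < (pvCells g).length)
    (he : pvFIdx g lab j = i) :
    pvGet lab ((pvCells g)[i]'hi).1 ((pvCells g)[i]'hi).2 = j := by
  subst he
  exact pvFIdx_spec g lab j hi

-- ---------- the grand invariant ----------
structure PVInv (g : List (List Int)) (bg : Int) (n : ℕ) : Prop where
  seen_sub : ∀ p ∈ (pvB g bg n).1, p.1 < pvH g ∧ p.2 < pvW g ∧ pvGet g p.1 p.2 ≠ bg
  seen_nodup : ((pvB g bg n).1 : List (ℕ × ℕ)).Nodup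
  seen_pre : ∀ p ∈ pvPreL g n, pvGet g p.1 p.2 ≠ bg → p ∈ (pvB g bg n).1
  wfA : ∀ X, X ≠ bg → pvWf g (pvA g X n).1
  relA : ∀ X, X ≠ bg → ∀ r c, r < pvH g → c < pvW g →
    (pvGet (pvA g X n).1 r c ≠ -1 ↔ ((r, c) ∈ (pvB g bg n).1 ∧ pvGet g r c = X))
  nnA : ∀ X, X ≠ bg → 0 ≤ (pvA g X n).2
  valsA : ∀ X, X ≠ bg → ∀ r c, r < pvH g → c < pvW g →
    pvGet (pvA g X n).1 r c = -1 ∨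
      (0 ≤ pvGet (pvA g X n).1 r c ∧ pvGet (pvA g X n).1 r c < (pvA g X n).2)
  compsEq : ∀ X, X ≠ bg → (pvB g bg n).2.getD X [] =
    (List.range (pvA g X n).2.toNat).map (fun j : ℕ => pvEntry g (pvA g X n).1 (j : Int))
  fIdxLt : ∀ X, X ≠ bg → ∀ j : ℕ, j < (pvA g X n).2.toNat →
    pvFIdx g (pvA g X n).1 (j : Int) < n
  fIdxMono : ∀ X, X ≠ bg → ∀ i j : ℕ, i < j → j < (pvA g X n).2.toNat →
    pvFIdx g (pvA g X n).1 (i : Int) < pvFIdx g (pvA g X n).1 (j : Int)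
  keysEq : (pvB g bg n).2.keys =
    PySem.List.dedup (((pvPreL g n).filter (fun p => ¬ pvGet g p.1 p.2 = bg)).map
      (fun p => pvGet g p.1 p.2))

lemma pvInv_zero (g : List (List Int)) (bg : Int) : PVInv g bg 0 := by
  have hpre : pvPreL g 0 = [] := by simp [pvPreL]
  have hB : pvB g bg 0 = ((PySem.Set.empty : PySem.Set (ℕ × ℕ)), PySem.Dict.empty) := by
    simp [pvB, hpre]
  have hA : ∀ X, pvA g X 0 = (pvLab0 g, 0) := by intro X; simp [pvA, hpre]
  refine ⟨?_, ?_, ?_, ?_, ?_, ?_, ?_, ?_, ?_, ?_, ?_⟩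
  · intro p hp; rw [hB] at hp; simp [PySem.Set.empty] at hp
  · rw [hB]; simp [PySem.Set.empty]
  · intro p hp; rw [hpre] at hp; simp at hp
  · intro X _; rw [hA]; exact pvWf_lab0 g
  · intro X _ r c hr hc
    rw [hA, hB]
    simp [pvGet_lab0' g r c hr hc, PySem.Set.empty]
  · intro X _; rw [hA]
  · intro X _ r c hr hc; rw [hA]; exact Or.inl (pvGet_lab0' g r c hr hc)
  · intro X _; rw [hA, hB]; simp
  · intro X _ j hj; rw [hA] at hj; simp at hj
  · intro X _ i j hij hj; rw [hA] at hj; simp at hj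
  · rw [hB, hpre]; simp [PySem.List.dedup]

lemma pvInv_step (g : List (List Int)) (bg : Int) (n : ℕ) (hn : n < (pvCells g).length)
    (H : PVInv g bg n) : PVInv g bg (n + 1) := by
  have hpmem : (pvCells g)[n] ∈ pvCells g := List.getElem_mem hn
  have hpb := (pvCells_mem g ((pvCells g)[n])).mp hpmem
  have hsucc := pvPreL_succ g n hn
  have hBsucc : pvB g bg (n + 1) = pvStB g bg (pvB g bg n) ((pvCells g)[n]) := by
    rw [pvB, pvB, pvPreL, pvPreL] at *
    rw [hsucc, List.foldl_append, List.foldl_cons, List.foldl_nil]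
  have hAsucc : ∀ X, pvA g X (n + 1) = pvStA g X (pvA g X n) ((pvCells g)[n]) := by
    intro X
    rw [pvA, pvA, hsucc, List.foldl_append, List.foldl_cons, List.foldl_nil]
  have hpnotpre : (pvCells g)[n] ∉ pvPreL g n := pv_not_mem_take _ (pvCells_nodup g) n hn
  by_cases hbg : pvGet g ((pvCells g)[n]).1 ((pvCells g)[n]).2 = bg
  · -- the scanned cell is background: both sides skip it
    have hB' : pvB g bg (n + 1) = pvB g bg n := by
      rw [hBsucc]
      simp only [pvStB]
      rw [if_pos (Or.inl hbg)]
    have hA' : ∀ X, X ≠ bg → pvA g X (n + 1) = pvA g X n := by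
      intro X hX
      rw [hAsucc, pvStA, if_neg]
      rintro ⟨h1, _⟩
      exact hX (h1 ▸ hbg)
    refine ⟨?_, ?_, ?_, ?_, ?_, ?_, ?_, ?_, ?_, ?_, ?_⟩
    · rw [hB']; exact H.seen_sub
    · rw [hB']; exact H.seen_nodup
    · intro q hq hqbg
      rw [hB']
      rw [hsucc] at hq
      rcases List.mem_append.mp hq with h | h
      · exact H.seen_pre q h hqbg
      · rw [List.mem_singleton] at h
        subst h
        exact absurd hbg hqbg
    · intro X hX; rw [hA' X hX]; exact H.wfA X hX
    · intro X hX; rw [hA' X hX, hB']; exact H.relA X hX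
    · intro X hX; rw [hA' X hX]; exact H.nnA X hX
    · intro X hX; rw [hA' X hX]; exact H.valsA X hX
    · intro X hX; rw [hA' X hX, hB']; exact H.compsEq X hX
    · intro X hX j hj
      rw [hA' X hX] at hj ⊢
      exact Nat.lt_succ_of_lt (H.fIdxLt X hX j hj)
    · intro X hX i j hij hj; rw [hA' X hX] at hj ⊢; exact H.fIdxMono X hX i j hij hj
    · rw [hB', hsucc, List.filter_append]
      have : List.filter (fun p => ¬pvGet g p.1 p.2 = bg) [(pvCells g)[n]] = [] := by
        simp [hbg]
      rw [this, List.append_nil]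
      exact H.keysEq
  · by_cases hseen : (pvCells g)[n] ∈ (pvB g bg n).1
    · -- already seen: both sides skip it
      have hB' : pvB g bg (n + 1) = pvB g bg n := by
        rw [hBsucc]
        simp only [pvStB]
        rw [if_pos (Or.inr (by simpa using hseen))]
      have hA' : ∀ X, X ≠ bg → pvA g X (n + 1) = pvA g X n := by
        intro X hX
        rw [hAsucc, pvStA, if_neg]
        rintro ⟨h1, h2⟩
        have hne : pvGet (pvA g X n).1 ((pvCells g)[n]).1 ((pvCells g)[n]).2 ≠ -1 := by
          by_cases hXX : X = pvGet g ((pvCells g)[n]).1 ((pvCells g)[n]).2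
          · exact (H.relA X hX _ _ hpb.1 hpb.2).mpr ⟨hseen, hXX.symm⟩
          · exact absurd h1.symm hXX
        exact hne h2
      -- the colour of this cell already occurs among the previous non-bg cells
      have hX0mem : pvGet g ((pvCells g)[n]).1 ((pvCells g)[n]).2 ∈
          ((pvPreL g n).filter (fun p => ¬pvGet g p.1 p.2 = bg)).map (fun p => pvGet g p.1 p.2) := by
        have hlab : pvGet (pvA g (pvGet g ((pvCells g)[n]).1 ((pvCells g)[n]).2) n).1
            ((pvCells g)[n]).1 ((pvCells g)[n]).2 ≠ -1 :=
          (H.relA _ hbg _ _ hpb.1 hpb.2).mpr ⟨hseen, rfl⟩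
        rcases H.valsA _ hbg _ _ hpb.1 hpb.2 with h | ⟨hge, hlt⟩
        · exact absurd h hlab
        set X0 := pvGet g ((pvCells g)[n]).1 ((pvCells g)[n]).2
        set j := pvGet (pvA g X0 n).1 ((pvCells g)[n]).1 ((pvCells g)[n]).2 with hj
        have hjnat : j.toNat < (pvA g X0 n).2.toNat := by omega
        have hfi := H.fIdxLt X0 hbg j.toNat hjnat
        have hfilen : pvFIdx g (pvA g X0 n).1 (j.toNat : Int) < (pvCells g).length := by
          calc pvFIdx g (pvA g X0 n).1 (j.toNat : Int) < n := hfi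
          _ ≤ (pvCells g).length := Nat.le_of_lt hn
        set q := (pvCells g)[pvFIdx g (pvA g X0 n).1 (j.toNat : Int)] with hqdef
        have hqmem : q ∈ pvCells g := List.getElem_mem hfilen
        have hqb := (pvCells_mem g q).mp hqmem
        have hqlab : pvGet (pvA g X0 n).1 q.1 q.2 = (j.toNat : Int) :=
          pvFIdx_spec g (pvA g X0 n).1 (j.toNat : Int) hfilen
        have hqseen : q ∈ (pvB g bg n).1 ∧ pvGet g q.1 q.2 = X0 := by
          refine (H.relA X0 hbg _ _ hqb.1 hqb.2).mp ?_
          rw [hqlab]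
          omega
        have hqpre : q ∈ pvPreL g n := by
          rw [pvPreL, hqdef]
          exact pvMem_take_of_lt _ _ n hfi hfilen
        refine List.mem_map.mpr ⟨q, List.mem_filter.mpr ⟨hqpre, by simpa using hqseen.2 ▸ hbg⟩, hqseen.2⟩
      refine ⟨?_, ?_, ?_, ?_, ?_, ?_, ?_, ?_, ?_, ?_, ?_⟩
      · rw [hB']; exact H.seen_sub
      · rw [hB']; exact H.seen_nodup
      · intro q hq hqbg
        rw [hB']
        rw [hsucc] at hq
        rcases List.mem_append.mp hq with h | h
        · exact H.seen_pre q h hqbg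
        · rw [List.mem_singleton] at h
          subst h
          exact hseen
      · intro X hX; rw [hA' X hX]; exact H.wfA X hX
      · intro X hX; rw [hA' X hX, hB']; exact H.relA X hX
      · intro X hX; rw [hA' X hX]; exact H.nnA X hX
      · intro X hX; rw [hA' X hX]; exact H.valsA X hX
      · intro X hX; rw [hA' X hX, hB']; exact H.compsEq X hX
      · intro X hX j hj
        rw [hA' X hX] at hj ⊢
        exact Nat.lt_succ_of_lt (H.fIdxLt X hX j hj)
      · intro X hX i j hij hj; rw [hA' X hX] at hj ⊢; exact H.fIdxMono X hX i j hij hj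
      · rw [hB', hsucc, List.filter_append]
        have hf1 : List.filter (fun p => ¬pvGet g p.1 p.2 = bg) [(pvCells g)[n]] =
            [(pvCells g)[n]] := by simp [hbg]
        rw [hf1, List.map_append]
        simp only [List.map_cons, List.map_nil]
        rw [pvDedup_append_singleton, if_pos (by simpa using hX0mem)]
        exact H.keysEq
    · -- seed case: a new component is grown
      have hnn := H.nnA _ hbg
      have hwf := H.wfA _ hbg
      have hlabp : pvGet (pvA g (pvGet g ((pvCells g)[n]).1 ((pvCells g)[n]).2) n).1
          ((pvCells g)[n]).1 ((pvCells g)[n]).2 = -1 := by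
        by_contra hne
        exact hseen ((H.relA _ hbg _ _ hpb.1 hpb.2).mp hne).1
      set X0 := pvGet g ((pvCells g)[n]).1 ((pvCells g)[n]).2 with hX0def
      set lab := (pvA g X0 n).1 with hlabdef
      set ncur := (pvA g X0 n).2 with hncurdef
      set seen := (pvB g bg n).1 with hseendef
      set comps := (pvB g bg n).2 with hcompsdef
      have hadd : PySem.Set.add seen ((pvCells g)[n]) = seen ++ [(pvCells g)[n]] :=
        PySem.Set.add_of_not_mem hseen
      have hnd1 : ((seen ++ [(pvCells g)[n]]) : List (ℕ × ℕ)).Nodup := by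
        refine List.Nodup.append H.seen_nodup (by simp) ?_
        intro a ha hb
        rw [List.mem_singleton] at hb
        subst hb
        exact hseen ha
      have hrel1 : pvRel g X0 (pvSet lab ((pvCells g)[n]).1 ((pvCells g)[n]).2 ncur)
          (seen ++ [(pvCells g)[n]]) := by
        refine ⟨pvWf_pvSet g lab hwf _ _ ncur, ?_⟩
        intro r c hr hc
        by_cases hp : ((r, c) : ℕ × ℕ) = (pvCells g)[n]
        · have h1' : r = ((pvCells g)[n]).1 := by rw [← hp]
          have h2' : c = ((pvCells g)[n]).2 := by rw [← hp]
          rw [h1', h2', pvGet_pvSet_same g lab hwf _ _ hpb.1 hpb.2 ncur]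
          have hcne : ncur ≠ -1 := by omega
          simp [hcne, hX0def]
        · rw [pvGet_pvSet_ne lab _ _ r c (by simpa using hp) ncur]
          rw [H.relA X0 hbg r c hr hc]
          constructor
          · rintro ⟨hm, hx⟩; exact ⟨List.mem_append_left _ hm, hx⟩
          · rintro ⟨hm, hx⟩
            rcases List.mem_append.mp hm with h | h
            · exact ⟨h, hx⟩
            · exact absurd (List.mem_singleton.mp h) hp
      obtain ⟨Δ, hAres, hBres, hΔnd, hΔmem⟩ :=
        pvLockstep g X0 ncur hnn (pvH g * pvW g + 1)
          (pvSet lab ((pvCells g)[n]).1 ((pvCells g)[n]).2 ncur)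
          (seen ++ [(pvCells g)[n]]) [(pvCells g)[n]] [(pvCells g)[n]] hrel1 hnd1
      set C : List (ℕ × ℕ) := (pvCells g)[n] :: Δ with hCdef
      have hCb : ∀ q ∈ C, q.1 < pvH g ∧ q.2 < pvW g ∧ pvGet g q.1 q.2 = X0 ∧ q ∉ seen := by
        intro q hq
        rcases List.mem_cons.mp hq with h | h
        · subst h; exact ⟨hpb.1, hpb.2, rfl, hseen⟩
        · have := hΔmem q h
          exact ⟨this.1, this.2.1, this.2.2.1, fun hc => this.2.2.2 (List.mem_append_left _ hc)⟩
      have hCnd : C.Nodup := by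
        refine List.nodup_cons.mpr ⟨?_, hΔnd⟩
        intro hmem
        exact (hΔmem _ hmem).2.2.2 (List.mem_append_right _ (by simp))
      have hCpre : ∀ q ∈ C, q ∉ pvPreL g n := by
        intro q hq hqpre
        have := hCb q hq
        exact this.2.2.2 (H.seen_pre q hqpre (by rw [this.2.2.1]; exact hbg))
      have hCbb : ∀ q ∈ C, q.1 < pvH g ∧ q.2 < pvW g := fun q hq => ⟨(hCb q hq).1, (hCb q hq).2.1⟩
      have hlab' : pvA g X0 (n + 1) =
          (C.foldl (fun L q => pvSet L q.1 q.2 ncur) lab, ncur + 1) := by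
        rw [hAsucc, pvStA, if_pos ⟨rfl, hlabp⟩, hCdef, List.foldl_cons]
        rw [← hncurdef, ← hlabdef, hAres]
      have hget' : ∀ r c, pvGet (C.foldl (fun L q => pvSet L q.1 q.2 ncur) lab) r c =
          if (r, c) ∈ C then ncur else pvGet lab r c :=
        pvGet_foldSet g ncur C hCbb lab hwf
      have hwf' : pvWf g (C.foldl (fun L q => pvSet L q.1 q.2 ncur) lab) :=
        pvWf_foldSet g ncur C lab hwf
      have hlabC : ∀ q ∈ C, pvGet lab q.1 q.2 = -1 := by
        intro q hq
        have hb := hCb q hq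
        by_contra hne
        exact hb.2.2.2 ((H.relA X0 hbg _ _ hb.1 hb.2.1).mp hne).1
      have hstep : pvStB g bg (pvB g bg n) ((pvCells g)[n]) =
          (seen ++ C, comps.insert X0 (comps.getD X0 [] ++ [(C.length, pvBbOf C)])) := by
        simp only [pvStB]
        rw [if_neg (by
          rintro (h | h)
          · exact hbg h
          · exact hseen (by simpa using h))]
        rw [show ((((pvCells g)[n]).1, ((pvCells g)[n]).2) : ℕ × ℕ) = (pvCells g)[n] from rfl]
        rw [hadd, hBres]
        simp only [hCdef]
        rw [show ([(pvCells g)[n]] ++ Δ : List (ℕ × ℕ)) = (pvCells g)[n] :: Δ from rfl]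
        simp only [List.map_cons, PySem.List.min?_id_cons, PySem.List.max?_id_cons,
          Option.getD_some]
        simp [pvBbOf, List.append_assoc]
        rfl
      have hB' : pvB g bg (n + 1) =
          (seen ++ C, comps.insert X0 (comps.getD X0 [] ++ [(C.length, pvBbOf C)])) := by
        rw [hBsucc, hstep]
      have hAX : ∀ X, X ≠ bg → X ≠ X0 → pvA g X (n + 1) = pvA g X n := by
        intro X _ hXX
        rw [hAsucc, pvStA, if_neg]
        rintro ⟨h1, _⟩
        exact hXX h1.symm
      -- the new class is exactly C
      have hclsNew : List.Perm (pvCls g (C.foldl (fun L q => pvSet L q.1 q.2 ncur) lab) ncur) C := by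
        refine (List.perm_ext_iff_of_nodup ((pvCells_nodup g).filter _) hCnd).mpr ?_
        intro q
        constructor
        · intro hq
          have hqc := List.mem_filter.mp hq
          have hqb := (pvCells_mem g q).mp hqc.1
          have hql : pvGet (C.foldl (fun L q => pvSet L q.1 q.2 ncur) lab) q.1 q.2 = ncur :=
            by simpa using hqc.2
          rw [hget' q.1 q.2] at hql
          by_cases hmem : (q.1, q.2) ∈ C
          · simpa using hmem
          · rw [if_neg hmem] at hql
            rcases H.valsA X0 hbg q.1 q.2 hqb.1 hqb.2 with h | ⟨_, hlt⟩
            · rw [← hlabdef] at h; omega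
            · rw [← hlabdef, ← hncurdef] at hlt; omega
        · intro hq
          refine List.mem_filter.mpr ⟨(pvCells_mem g q).mpr ⟨(hCb q hq).1, (hCb q hq).2.1⟩, ?_⟩
          have : ((q.1, q.2) : ℕ × ℕ) ∈ C := by simpa using hq
          simp [hget' q.1 q.2, this]
      have hclsOld : ∀ j : Int, 0 ≤ j → j < ncur →
          pvCls g (C.foldl (fun L q => pvSet L q.1 q.2 ncur) lab) j = pvCls g lab j := by
        intro j hj0 hjlt
        refine List.filter_congr ?_
        intro q hq
        rw [hget' q.1 q.2]
        by_cases hmem : (q.1, q.2) ∈ C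
        · rw [if_pos hmem]
          have h1 : pvGet lab q.1 q.2 = -1 := hlabC _ (by simpa using hmem)
          have : ¬ (ncur = j) := by omega
          have h2 : ¬ (pvGet lab q.1 q.2 = j) := by omega
          simp [this, h2]
        · rw [if_neg hmem]
      have hfidxOld : ∀ j : Int, 0 ≤ j → j < ncur →
          pvFIdx g (C.foldl (fun L q => pvSet L q.1 q.2 ncur) lab) j = pvFIdx g lab j := by
        intro j hj0 hjlt
        refine pvFindIdx_congr _ _ _ ?_
        intro q hq
        rw [hget' q.1 q.2]
        by_cases hmem : (q.1, q.2) ∈ C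
        · rw [if_pos hmem]
          have h1 : pvGet lab q.1 q.2 = -1 := hlabC _ (by simpa using hmem)
          have h2 : ¬ (ncur = j) := by omega
          have h3 : ¬ (pvGet lab q.1 q.2 = j) := by omega
          simp [h2, h3]
        · rw [if_neg hmem]
      have hfidxNew : pvFIdx g (C.foldl (fun L q => pvSet L q.1 q.2 ncur) lab) ncur = n := by
        rw [pvFIdx]
        refine (List.findIdx_eq hn).mpr ⟨?_, ?_⟩
        · simp only [decide_eq_true_eq]
          rw [hget']
          rw [if_pos (by simp [hCdef])]
        · intro i hij
          simp only [decide_eq_false_iff_not]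
          have hilen : i < (pvCells g).length := by omega
          have hipre : (pvCells g)[i] ∈ pvPreL g n := pvMem_take_of_lt _ _ n hij hilen
          have hiC : ((pvCells g)[i].1, (pvCells g)[i].2) ∉ C := by
            intro hmem
            exact hCpre _ (by simpa using hmem) (by simpa using hipre)
          rw [hget', if_neg hiC]
          by_cases hib : (pvCells g)[i].1 < pvH g ∧ (pvCells g)[i].2 < pvW g
          · rcases H.valsA X0 hbg _ _ hib.1 hib.2 with h | ⟨_, hlt⟩
            · rw [← hlabdef] at h; omega
            · rw [← hlabdef, ← hncurdef] at hlt; omega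
          · exact absurd ((pvCells_mem g _).mp (List.getElem_mem hilen)) hib
      have htoNat : (ncur + 1).toNat = ncur.toNat + 1 := by omega
      have hcastn : ((ncur.toNat : ℕ) : Int) = ncur := Int.toNat_of_nonneg hnn
      refine ⟨?_, ?_, ?_, ?_, ?_, ?_, ?_, ?_, ?_, ?_, ?_⟩
      · rw [hB']
        intro q hq
        rcases List.mem_append.mp hq with h | h
        · exact H.seen_sub q h
        · have := hCb q h
          exact ⟨this.1, this.2.1, by rw [this.2.2.1]; exact hbg⟩
      · rw [hB']
        refine List.Nodup.append H.seen_nodup hCnd ?_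
        intro a ha hb
        exact (hCb a hb).2.2.2 ha
      · intro q hq hqbg
        rw [hB']
        rw [hsucc] at hq
        rcases List.mem_append.mp hq with h | h
        · exact List.mem_append_left _ (H.seen_pre q h hqbg)
        · rw [List.mem_singleton] at h
          subst h
          exact List.mem_append_right _ (by simp [hCdef])
      · intro X hX
        by_cases hXX : X = X0
        · subst hXX; rw [hlab']; exact hwf'
        · rw [hAX X hX hXX]; exact H.wfA X hX
      · intro X hX r c hr hc
        rw [hB']
        by_cases hXX : X = X0
        · subst hXX
          rw [hlab']
          simp only []
          rw [hget' r c]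
          by_cases hmem : ((r, c) : ℕ × ℕ) ∈ C
          · have hb := hCb _ hmem
            have hcne : ncur ≠ -1 := by omega
            simp [hcne, List.mem_append, hmem, hb.2.2.1]
          · rw [if_neg hmem, H.relA X0 hbg r c hr hc]
            constructor
            · rintro ⟨hm, hx⟩; exact ⟨List.mem_append_left _ hm, hx⟩
            · rintro ⟨hm, hx⟩
              rcases List.mem_append.mp hm with h | h
              · exact ⟨h, hx⟩
              · exact absurd h hmem
        · rw [hAX X hX hXX, H.relA X hX r c hr hc]
          constructor
          · rintro ⟨hm, hx⟩; exact ⟨List.mem_append_left _ hm, hx⟩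
          · rintro ⟨hm, hx⟩
            rcases List.mem_append.mp hm with h | h
            · exact ⟨h, hx⟩
            · exact absurd hx (by rw [(hCb _ h).2.2.1]; exact fun hh => hXX hh.symm)
      · intro X hX
        by_cases hXX : X = X0
        · subst hXX; rw [hlab']; simp only []; omega
        · rw [hAX X hX hXX]; exact H.nnA X hX
      · intro X hX r c hr hc
        by_cases hXX : X = X0
        · subst hXX
          rw [hlab']
          simp only []
          rw [hget' r c]
          by_cases hmem : ((r, c) : ℕ × ℕ) ∈ C
          · rw [if_pos hmem]; right; omega
          · rw [if_neg hmem]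
            rcases H.valsA X0 hbg r c hr hc with h | ⟨h1, h2⟩
            · left; exact h
            · right; constructor; exact h1; rw [← hlabdef, ← hncurdef] at *; omega
        · rw [hAX X hX hXX]
          rcases H.valsA X hX r c hr hc with h | ⟨h1, h2⟩
          · left; exact h
          · right; exact ⟨h1, h2⟩
      · intro X hX
        rw [hB']
        by_cases hXX : X = X0
        · subst hXX
          rw [PySem.Dict.getD_insert, if_pos rfl, hlab']
          simp only []
          rw [htoNat, List.range_succ, List.map_append]
          rw [H.compsEq X0 hbg]
          congr 1
          · refine List.map_congr_left ?_
            intro j hj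
            rw [List.mem_range] at hj
            have hj' : ((j : ℕ) : Int) < ncur := by omega
            rw [pvEntry, pvEntry, hclsOld (j : Int) (by omega) hj']
          · simp only [List.map_cons, List.map_nil, pvEntry, hcastn]
            have hlen : (pvCls g (C.foldl (fun L q => pvSet L q.1 q.2 ncur) lab) ncur).length =
                C.length := hclsNew.length_eq
            have hnemp : pvCls g (C.foldl (fun L q => pvSet L q.1 q.2 ncur) lab) ncur ≠ [] := by
              intro hnil
              rw [hnil] at hlen
              simp [hCdef] at hlen
            rw [hlen, pvBbOf_perm _ _ hclsNew hnemp]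
        · rw [hAX X hX hXX, PySem.Dict.getD_insert_of_ne _ _ _ hXX]
          exact H.compsEq X hX
      · intro X hX j hj
        by_cases hXX : X = X0
        · subst hXX
          rw [hlab'] at hj ⊢
          simp only [] at hj ⊢
          rw [htoNat] at hj
          rcases Nat.lt_succ_iff_lt_or_eq.mp hj with h | h
          · rw [hfidxOld (j : Int) (by omega) (by omega)]
            exact Nat.lt_succ_of_lt (H.fIdxLt X0 hbg j h)
          · subst h
            rw [hcastn, hfidxNew]
            omega
        · rw [hAX X hX hXX] at hj ⊢
          exact Nat.lt_succ_of_lt (H.fIdxLt X hX j hj)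
      · intro X hX i j hij hj
        by_cases hXX : X = X0
        · subst hXX
          rw [hlab'] at hj ⊢
          simp only [] at hj ⊢
          rw [htoNat] at hj
          rcases Nat.lt_succ_iff_lt_or_eq.mp hj with h | h
          · rw [hfidxOld (i : Int) (by omega) (by omega),
              hfidxOld (j : Int) (by omega) (by omega)]
            exact H.fIdxMono X0 hbg i j hij h
          · subst h
            rw [hfidxOld (i : Int) (by omega) (by omega), hcastn, hfidxNew]
            exact H.fIdxLt X0 hbg i hij
        · rw [hAX X hX hXX] at hj ⊢
          exact H.fIdxMono X hX i j hij hj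
      · rw [hB']
        have hbg' : ¬ pvGet g ((pvCells g)[n]).1 ((pvCells g)[n]).2 = bg := hbg
        have hcont : comps.contains X0 = true ↔
            X0 ∈ ((pvPreL g n).filter (fun p => ¬ pvGet g p.1 p.2 = bg)).map
              (fun p => pvGet g p.1 p.2) := by
          rw [PySem.Dict.contains_iff_mem_keys]
          rw [show comps.keys = (pvB g bg n).2.keys from rfl, H.keysEq,
            PySem.List.dedup_eq_ofList, PySem.Set.mem_ofList]
        have hf1 : List.filter (fun p => decide (¬ pvGet g p.1 p.2 = bg)) [(pvCells g)[n]] =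
            [(pvCells g)[n]] := by simp [hbg']
        simp only []
        rw [hsucc, List.filter_append, hf1, List.map_append]
        simp only [List.map_cons, List.map_nil]
        rw [pvDedup_append_singleton]
        by_cases hmemX : pvGet g ((pvCells g)[n]).1 ((pvCells g)[n]).2 ∈
            ((pvPreL g n).filter (fun p => ¬ pvGet g p.1 p.2 = bg)).map
              (fun p => pvGet g p.1 p.2)
        · rw [if_pos (by simpa using hmemX)]
          rw [PySem.Dict.keys_insert_of_contains _ _ (hcont.mpr hmemX)]
          exact H.keysEq
        · rw [if_neg (by simpa using hmemX)]
          have hcf : comps.contains X0 = false := by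
            rw [Bool.eq_false_iff]
            intro h
            exact hmemX (hcont.mp h)
          rw [PySem.Dict.keys_insert_of_not_contains _ _ hcf]
          rw [show (pvB g bg n).2.keys = comps.keys from rfl]
          rw [show comps.keys = (pvB g bg n).2.keys from rfl, H.keysEq]

lemma pvInv_all (g : List (List Int)) (bg : Int) (n : ℕ) (hn : n ≤ (pvCells g).length) :
    PVInv g bg n := by
  induction n with
  | zero => exact pvInv_zero g bg
  | succ n ih => exact pvInv_step g bg n (by omega) (ih (by omega))


-- ---------- rescan of a labelled matrix ----------
def pvScanStep (lab : List (List Int))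
    (sb : PySem.Dict Int ℕ × PySem.Dict Int (ℕ × ℕ × ℕ × ℕ)) (p : ℕ × ℕ) :
    PySem.Dict Int ℕ × PySem.Dict Int (ℕ × ℕ × ℕ × ℕ) :=
  let cid := pvGet lab p.1 p.2
  if cid ≥ 0 then
    (sb.1.insert cid (sb.1.getD cid 0 + 1),
     match sb.2.get? cid with
     | none => sb.2.insert cid (p.1, p.2, p.1, p.2)
     | some (r0, c0, r1, c1) =>
         sb.2.insert cid (min r0 p.1, min c0 p.2, max r1 p.1, max c1 p.2))
  else sb

def pvClsPre (g lab : List (List Int)) (j : Int) (m : ℕ) : List (ℕ × ℕ) :=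
  (pvPreL g m).filter (fun p => pvGet lab p.1 p.2 = j)

lemma pvBbOf_append (l : List (ℕ × ℕ)) (hl : l ≠ []) (p : ℕ × ℕ) :
    pvBbOf (l ++ [p]) = (min (pvBbOf l).1 p.1, min (pvBbOf l).2.1 p.2,
      max (pvBbOf l).2.2.1 p.1, max (pvBbOf l).2.2.2 p.2) := by
  match l with
  | [] => exact absurd rfl hl
  | x :: t =>
    simp [pvBbOf, List.map_append, List.foldl_append]

lemma rescan_aux (g lab : List (List Int)) (N : ℕ)
    (hvals : ∀ r c, r < pvH g → c < pvW g →
      pvGet lab r c = -1 ∨ (0 ≤ pvGet lab r c ∧ pvGet lab r c < (N : Int)))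
    (hmono : ∀ i j : ℕ, i < j → j < N → pvFIdx g lab (i : Int) < pvFIdx g lab (j : Int)) :
    ∀ m, m ≤ (pvCells g).length →
    ∃ k, k ≤ N ∧ (∀ j : ℕ, j < N → (j < k ↔ pvFIdx g lab (j : Int) < m)) ∧
      ((pvPreL g m).foldl (pvScanStep lab) (PySem.Dict.empty, PySem.Dict.empty)).1.items =
        (List.range k).map (fun j : ℕ => ((j : Int), (pvClsPre g lab (j : Int) m).length)) ∧
      ((pvPreL g m).foldl (pvScanStep lab) (PySem.Dict.empty, PySem.Dict.empty)).2.items =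
        (List.range k).map (fun j : ℕ => ((j : Int), pvBbOf (pvClsPre g lab (j : Int) m))) := by
  intro m
  induction m with
  | zero =>
    intro _
    refine ⟨0, Nat.zero_le N, ?_, ?_, ?_⟩
    · intro j hj; simp
    · simp [pvPreL]
      rfl
    · simp [pvPreL]
      rfl
  | succ m ih =>
    intro hm1
    have hm : m < (pvCells g).length := by omega
    obtain ⟨k, hkN, hseg, hsz, hbb⟩ := ih (by omega)
    have hsucc := pvPreL_succ g m hm
    have hpb := (pvCells_mem g ((pvCells g)[m])).mp (List.getElem_mem hm)
    have hfold : (pvPreL g (m + 1)).foldl (pvScanStep lab) (PySem.Dict.empty, PySem.Dict.empty) =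
        pvScanStep lab
          ((pvPreL g m).foldl (pvScanStep lab) (PySem.Dict.empty, PySem.Dict.empty))
          ((pvCells g)[m]) := by
      rw [hsucc, List.foldl_append, List.foldl_cons, List.foldl_nil]
    have hclsstep : ∀ j : Int, pvClsPre g lab j (m + 1) =
        pvClsPre g lab j m ++ (if pvGet lab ((pvCells g)[m]).1 ((pvCells g)[m]).2 = j
          then [(pvCells g)[m]] else []) := by
      intro j
      rw [pvClsPre, pvClsPre, hsucc, List.filter_append]
      congr 1
      simp [List.filter_singleton]
    have hkeys1 : ((pvPreL g m).foldl (pvScanStep lab)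
        (PySem.Dict.empty, PySem.Dict.empty)).1.keys =
        (List.range k).map (fun j : ℕ => (j : Int)) := by
      show (((pvPreL g m).foldl (pvScanStep lab)
        (PySem.Dict.empty, PySem.Dict.empty)).1.items).map Prod.fst = _
      rw [hsz, List.map_map]
      rfl
    have hkeys2 : ((pvPreL g m).foldl (pvScanStep lab)
        (PySem.Dict.empty, PySem.Dict.empty)).2.keys =
        (List.range k).map (fun j : ℕ => (j : Int)) := by
      show (((pvPreL g m).foldl (pvScanStep lab)
        (PySem.Dict.empty, PySem.Dict.empty)).2.items).map Prod.fst = _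
      rw [hbb, List.map_map]
      rfl
    have hknd : ((List.range k).map (fun j : ℕ => (j : Int))).Nodup :=
      List.nodup_range.map (fun a b h => by omega)
    have hmemkeys : ∀ x : Int, x ∈ (List.range k).map (fun j : ℕ => (j : Int)) ↔
        (0 ≤ x ∧ x.toNat < k) := by
      intro x
      simp only [List.mem_map, List.mem_range]
      constructor
      · rintro ⟨j, hj, rfl⟩; omega
      · rintro ⟨h0, hk⟩; exact ⟨x.toNat, hk, by omega⟩
    rcases hvals _ _ hpb.1 hpb.2 with hlab | ⟨hge, hlt⟩
    · -- background cell: nothing changes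
      refine ⟨k, hkN, ?_, ?_, ?_⟩
      · intro j hj
        rw [hseg j hj]
        constructor
        · omega
        · intro h
          rcases Nat.lt_succ_iff_lt_or_eq.mp h with h' | h'
          · exact h'
          · exfalso
            have := pvFIdx_spec_at g lab (j : Int) m hm h'
            rw [hlab] at this
            omega
      · rw [hfold]
        simp only [pvScanStep]
        rw [if_neg (by rw [hlab]; omega)]
        rw [hsz]
        refine List.map_congr_left ?_
        intro j hj
        rw [hclsstep (j : Int), if_neg (by rw [hlab]; omega), List.append_nil]
      · rw [hfold]
        simp only [pvScanStep]
        rw [if_neg (by rw [hlab]; omega)]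
        rw [hbb]
        refine List.map_congr_left ?_
        intro j hj
        rw [hclsstep (j : Int), if_neg (by rw [hlab]; omega), List.append_nil]
    · -- a labelled cell
      set cid := pvGet lab ((pvCells g)[m]).1 ((pvCells g)[m]).2 with hciddef
      have hj0 : cid.toNat < N := by omega
      have hcast : ((cid.toNat : ℕ) : Int) = cid := Int.toNat_of_nonneg hge
      have hfle : pvFIdx g lab cid ≤ m := by
        by_contra hgt
        have := pvFIdx_not g lab cid m (by omega) hm
        exact this rfl
      by_cases hseenB : pvFIdx g lab cid < m
      · -- class already open
        have hj0k : cid.toNat < k := by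
          rw [hseg cid.toNat hj0, hcast]
          exact hseenB
        have hcont1 : ((pvPreL g m).foldl (pvScanStep lab)
            (PySem.Dict.empty, PySem.Dict.empty)).1.contains cid = true := by
          rw [PySem.Dict.contains_iff_mem_keys, hkeys1, hmemkeys]
          omega
        have hcont2 : ((pvPreL g m).foldl (pvScanStep lab)
            (PySem.Dict.empty, PySem.Dict.empty)).2.contains cid = true := by
          rw [PySem.Dict.contains_iff_mem_keys, hkeys2, hmemkeys]
          omega
        have hclsne : pvClsPre g lab cid m ≠ [] := by
          have hq := pvFIdx_spec g lab cid (by omega)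
          intro hnil
          have : (pvCells g)[pvFIdx g lab cid] ∈ pvClsPre g lab cid m := by
            rw [pvClsPre]
            refine List.mem_filter.mpr ⟨pvMem_take_of_lt _ _ m hseenB (by omega),
              by simpa using hq⟩
          rw [hnil] at this
          simp at this
        have hnocc : ∀ j : ℕ, j < N → j ≠ cid.toNat → pvFIdx g lab (j : Int) ≠ m := by
          intro j hj hne heq
          have := pvFIdx_spec_at g lab (j : Int) m hm heq
          rw [← hciddef] at this
          omega
        have hmemit1 : (cid, (pvClsPre g lab cid m).length) ∈
            ((pvPreL g m).foldl (pvScanStep lab)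
              (PySem.Dict.empty, PySem.Dict.empty)).1.items := by
          rw [hsz]
          refine List.mem_map.mpr ⟨cid.toNat, by simpa using hj0k, ?_⟩
          rw [hcast]
        have hmemit2 : (cid, pvBbOf (pvClsPre g lab cid m)) ∈
            ((pvPreL g m).foldl (pvScanStep lab)
              (PySem.Dict.empty, PySem.Dict.empty)).2.items := by
          rw [hbb]
          refine List.mem_map.mpr ⟨cid.toNat, by simpa using hj0k, ?_⟩
          rw [hcast]
        have hgd1 : ((pvPreL g m).foldl (pvScanStep lab)
            (PySem.Dict.empty, PySem.Dict.empty)).1.getD cid 0 =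
            (pvClsPre g lab cid m).length :=
          PySem.Dict.getD_of_mem_items _ hmemit1 (by rw [hkeys1]; exact hknd) 0
        rcases hbbval : pvBbOf (pvClsPre g lab cid m) with ⟨b1, b2, b3, b4⟩
        have hg2 : ((pvPreL g m).foldl (pvScanStep lab)
            (PySem.Dict.empty, PySem.Dict.empty)).2.get? cid = some (b1, b2, b3, b4) := by
          rw [← hbbval]
          exact PySem.Dict.get?_of_mem_items _ hmemit2 (by rw [hkeys2]; exact hknd)
        refine ⟨k, hkN, ?_, ?_, ?_⟩
        · intro j hj
          rw [hseg j hj]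
          constructor
          · omega
          · intro h
            rcases Nat.lt_succ_iff_lt_or_eq.mp h with h' | h'
            · exact h'
            · by_cases hje : j = cid.toNat
              · subst hje; rw [hcast]; exact hseenB
              · exact absurd h' (hnocc j hj hje)
        · rw [hfold]
          simp only [pvScanStep]
          rw [← hciddef]
          rw [if_pos (by omega)]
          rw [PySem.Dict.items_insert_of_contains _ _ hcont1, hsz, hgd1, List.map_map]
          refine List.map_congr_left ?_
          intro j hj
          rw [List.mem_range] at hj
          simp only [Function.comp]
          by_cases hje : j = cid.toNat
          · subst hje
            rw [hcast]
            rw [if_pos (beq_self_eq_true cid)]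
            rw [hclsstep, if_pos rfl, List.length_append]
            simp
          · rw [if_neg (by
              simp only [beq_iff_eq]
              intro hh
              exact hje (by omega))]
            rw [hclsstep, if_neg (by intro hh; exact hje (by omega)),
              List.append_nil]
        · rw [hfold]
          simp only [pvScanStep]
          rw [← hciddef]
          rw [if_pos (by omega)]
          simp only [hg2]
          rw [PySem.Dict.items_insert_of_contains _ _ hcont2, hbb, List.map_map]
          refine List.map_congr_left ?_
          intro j hj
          rw [List.mem_range] at hj
          simp only [Function.comp]
          by_cases hje : j = cid.toNat
          · subst hje
            rw [hcast]
            rw [if_pos (beq_self_eq_true cid)]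
            rw [hclsstep, if_pos rfl, pvBbOf_append _ hclsne, hbbval]
          · rw [if_neg (by
              simp only [beq_iff_eq]
              intro hh
              exact hje (by omega))]
            rw [hclsstep, if_neg (by intro hh; exact hje (by omega)),
              List.append_nil]
      · -- a new class opens: cid.toNat = k
        have hfeq : pvFIdx g lab cid = m := by omega
        have hj0k : cid.toNat = k := by
          have h1 : ¬ (cid.toNat < k) := by
            rw [hseg cid.toNat hj0, hcast]
            omega
          have h2 : ¬ (k < cid.toNat) := by
            intro hlt2
            have hkN' : k < N := by omega
            have h3 : ¬ (pvFIdx g lab (k : Int) < m) := by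
              rw [← hseg k hkN']
              omega
            have h4 := hmono k cid.toNat hlt2 hj0
            rw [hcast] at h4
            omega
          omega
        have hcast2 : ((k : ℕ) : Int) = cid := by omega
        have hclsempty : pvClsPre g lab cid m = [] := by
          rw [pvClsPre, List.filter_eq_nil_iff]
          intro q hq
          rw [pvPreL, List.mem_take_iff_getElem] at hq
          obtain ⟨i, hi, rfl⟩ := hq
          have := pvFIdx_not g lab cid i (by omega) (by omega)
          simpa using this
        have hcont1 : ((pvPreL g m).foldl (pvScanStep lab)
            (PySem.Dict.empty, PySem.Dict.empty)).1.contains cid = false := by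
          rw [Bool.eq_false_iff]
          intro h
          rw [PySem.Dict.contains_iff_mem_keys, hkeys1, hmemkeys] at h
          omega
        have hcont2 : ((pvPreL g m).foldl (pvScanStep lab)
            (PySem.Dict.empty, PySem.Dict.empty)).2.contains cid = false := by
          rw [Bool.eq_false_iff]
          intro h
          rw [PySem.Dict.contains_iff_mem_keys, hkeys2, hmemkeys] at h
          omega
        have hg1none : ((pvPreL g m).foldl (pvScanStep lab)
            (PySem.Dict.empty, PySem.Dict.empty)).1.get? cid = none :=
          (PySem.Dict.get?_eq_none_iff_contains _ _).mpr hcont1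
        have hg2none : ((pvPreL g m).foldl (pvScanStep lab)
            (PySem.Dict.empty, PySem.Dict.empty)).2.get? cid = none :=
          (PySem.Dict.get?_eq_none_iff_contains _ _).mpr hcont2
        have hgd1 : ((pvPreL g m).foldl (pvScanStep lab)
            (PySem.Dict.empty, PySem.Dict.empty)).1.getD cid 0 = 0 := by
          simp [PySem.Dict.getD, hg1none]
        refine ⟨k + 1, by omega, ?_, ?_, ?_⟩
        · intro j hj
          constructor
          · intro h
            rcases Nat.lt_succ_iff_lt_or_eq.mp h with h' | h'
            · have := (hseg j hj).mp h'
              omega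
            · subst h'
              rw [show ((j : ℕ) : Int) = cid from by omega, hfeq]
              omega
          · intro h
            by_cases h' : j < k
            · omega
            · by_cases hje : j = cid.toNat
              · omega
              · have h5 : k < j := by omega
                have h6 := hmono cid.toNat j (by omega) hj
                rw [hcast, hfeq] at h6
                omega
        · rw [hfold]
          simp only [pvScanStep]
          rw [← hciddef]
          rw [if_pos (by omega)]
          rw [PySem.Dict.items_insert_of_not_contains _ _ hcont1, hsz, hgd1]
          rw [List.range_succ, List.map_append]
          congr 1
          · refine List.map_congr_left ?_
            intro j hj
            rw [List.mem_range] at hj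
            rw [hclsstep, if_neg (by intro hh; omega), List.append_nil]
          · simp only [List.map_cons, List.map_nil]
            rw [hcast2, hclsstep, if_pos rfl, hclsempty]
            simp
        · rw [hfold]
          simp only [pvScanStep]
          rw [← hciddef]
          rw [if_pos (by omega)]
          simp only [hg2none]
          rw [PySem.Dict.items_insert_of_not_contains _ _ hcont2, hbb]
          rw [List.range_succ, List.map_append]
          congr 1
          · refine List.map_congr_left ?_
            intro j hj
            rw [List.mem_range] at hj
            rw [hclsstep, if_neg (by intro hh; omega), List.append_nil]
          · simp only [List.map_cons, List.map_nil]
            rw [hcast2, hclsstep, if_pos rfl, hclsempty]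
            simp [pvBbOf]

lemma rescan (g lab : List (List Int)) (N : ℕ) (_hwf : pvWf g lab)
    (hvals : ∀ r c, r < pvH g → c < pvW g →
      pvGet lab r c = -1 ∨ (0 ≤ pvGet lab r c ∧ pvGet lab r c < (N : Int)))
    (hne : ∀ j : ℕ, j < N → pvFIdx g lab (j : Int) < (pvCells g).length)
    (hmono : ∀ i j : ℕ, i < j → j < N → pvFIdx g lab (i : Int) < pvFIdx g lab (j : Int)) :
    let sb := (pvCells g).foldl (pvScanStep lab) (PySem.Dict.empty, PySem.Dict.empty)
    sb.1.items = (List.range N).map (fun j : ℕ => ((j : Int), (pvCls g lab (j : Int)).length)) ∧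
    ∀ j : ℕ, j < N → sb.2.getD (j : Int) (0, 0, 0, 0) = pvBbOf (pvCls g lab (j : Int)) := by
  obtain ⟨k, hkN, hseg, hsz, hbb⟩ := rescan_aux g lab N hvals hmono (pvCells g).length le_rfl
  have hfull : pvPreL g (pvCells g).length = pvCells g := by rw [pvPreL, List.take_length]
  have hkeq : k = N := by
    by_contra hne'
    have hkn : k < N := by omega
    have h1 : ¬ (k < k) := by omega
    rw [hseg k hkn] at h1
    exact h1 (hne k hkn)
  subst hkeq
  have hclsfull : ∀ j : Int, pvClsPre g lab j (pvCells g).length = pvCls g lab j := by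
    intro j
    rw [pvClsPre, hfull, pvCls]
  rw [hfull] at hsz hbb
  simp only [hclsfull] at hsz hbb
  refine ⟨?_, ?_⟩
  · exact hsz
  · intro j hj
    have hknd : ((List.range k).map (fun j : ℕ => (j : Int))).Nodup :=
      List.nodup_range.map (fun a b h => by omega)
    have hmem : ((j : Int), pvBbOf (pvCls g lab (j : Int))) ∈
        ((pvCells g).foldl (pvScanStep lab) (PySem.Dict.empty, PySem.Dict.empty)).2.items := by
      rw [hbb]
      exact List.mem_map.mpr ⟨j, by simpa using hj, rfl⟩
    refine PySem.Dict.getD_of_mem_items _ hmem ?_ _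
    show (((pvCells g).foldl (pvScanStep lab)
      (PySem.Dict.empty, PySem.Dict.empty)).2.items).map Prod.fst |>.Nodup
    rw [hbb, List.map_map]
    exact List.nodup_range.map (fun a b h => by
      simp only [Function.comp] at h
      omega)

-- ---------- most-common-colour agreement ----------
lemma argmax_aux (d : PySem.Dict Int Int) :
    ∀ (ks : List Int) (b : Int),
      ((ks.map (fun k => (k, d.getD k 0))).foldl
          (fun (bb : Int × Int) cf => if cf.2 > bb.1 then (cf.2, cf.1) else bb)
          (d.getD b 0, b)).2 =
        ks.foldl (fun best k' => if d.getD k' 0 > d.getD best 0 then k' else best) b := by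
  intro ks
  induction ks with
  | nil => intro b; rfl
  | cons k' ks ih =>
    intro b
    simp only [List.map_cons, List.foldl_cons]
    by_cases h : d.getD k' 0 > d.getD b 0
    · rw [if_pos h, if_pos h]
      exact ih k'
    · rw [if_neg h, if_neg h]
      exact ih b

lemma argmax_eq (d : PySem.Dict Int Int) (hnd : d.keys.Nodup)
    (hpos : ∀ kv ∈ d.items, 1 ≤ kv.2) :
    (d.items.foldl (fun (bb : Int × Int) cf => if cf.2 > bb.1 then (cf.2, cf.1) else bb) (0, 0)).2 =
      (match d.keys with
       | [] => (0 : Int)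
       | k :: ks => ks.foldl (fun best k' => if d.getD k' 0 > d.getD best 0 then k' else best) k) := by
  rw [PySem.Dict.items_eq_map_keys d hnd 0]
  rcases hkeys : d.keys with _ | ⟨k, ks⟩
  · simp
  · have hk : (k, d.getD k 0) ∈ d.items := by
      rw [PySem.Dict.items_eq_map_keys d hnd 0, hkeys]
      simp only [List.map_cons]
      exact List.mem_cons_self
    simp only [List.map_cons, List.foldl_cons]
    rw [if_pos (by
      have h2 : (1 : Int) ≤ d.getD k 0 := hpos _ hk
      show (0 : Int) < d.getD k 0
      omega)]
    exact argmax_aux d ks k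


-- ---------- selection-stream assembly ----------
def pvStream (g : List (List Int)) (X : Int) : List (ℕ × (ℕ × ℕ × ℕ × ℕ)) :=
  (List.range (pvA g X (pvCells g).length).2.toNat).map
    (fun j : ℕ => pvEntry g (pvA g X (pvCells g).length).1 (j : Int))
def pvSelStep (st : ℕ × Option (ℕ × ℕ × ℕ × ℕ)) (e : ℕ × (ℕ × ℕ × ℕ × ℕ)) :
    ℕ × Option (ℕ × ℕ × ℕ × ℕ) :=
  if e.1 > st.1 then (e.1, some e.2) else st

-- ---------- final assembly helpers ----------
lemma pvGridMem (a b : ℕ) (p : ℕ × ℕ) :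
    p ∈ (List.range a).flatMap (fun r => (List.range b).map (fun c => (r, c))) ↔
      p.1 < a ∧ p.2 < b := by
  obtain ⟨r, c⟩ := p
  simp [List.mem_flatMap]

lemma pvFoldlAppendMap {α β : Type} (l : List α) (f : α → β) :
    ∀ init : List β, l.foldl (fun out r => out ++ [f r]) init = init ++ l.map f := by
  induction l with
  | nil => intro init; simp
  | cons x t ih => intro init; simp [ih]

lemma pvWf_foldSetF (g : List (List Int)) (f : ℕ × ℕ → Int) (Δ : List (ℕ × ℕ)) :
    ∀ lab, pvWf g lab → pvWf g (Δ.foldl (fun L p => pvSet L p.1 p.2 (f p)) lab) := by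
  induction Δ with
  | nil => intro lab h; exact h
  | cons p t ih =>
    intro lab h
    exact ih _ (pvWf_pvSet g lab h p.1 p.2 (f p))

lemma pvGet_foldSetF (g : List (List Int)) (f : ℕ × ℕ → Int) (Δ : List (ℕ × ℕ))
    (hΔ : ∀ p ∈ Δ, p.1 < pvH g ∧ p.2 < pvW g) :
    ∀ lab, pvWf g lab → ∀ r c,
      pvGet (Δ.foldl (fun L p => pvSet L p.1 p.2 (f p)) lab) r c =
        if (r, c) ∈ Δ then f (r, c) else pvGet lab r c := by
  induction Δ with
  | nil => intro lab _ r c; simp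
  | cons p t ih =>
    obtain ⟨pr, pc⟩ := p
    intro lab hwf r c
    have hp := hΔ (pr, pc) (by simp)
    have ht : ∀ q ∈ t, q.1 < pvH g ∧ q.2 < pvW g := fun q hq => hΔ q (by simp [hq])
    rw [List.foldl_cons, ih ht _ (pvWf_pvSet g lab hwf pr pc (f (pr, pc))) r c]
    by_cases hmem : (r, c) ∈ t
    · rw [if_pos hmem, if_pos (by simp [hmem])]
    · by_cases hpe : ((r, c) : ℕ × ℕ) = (pr, pc)
      · have hr : r = pr := by simpa using congrArg Prod.fst hpe
        have hc : c = pc := by simpa using congrArg Prod.snd hpe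
        subst hr; subst hc
        rw [if_neg hmem, if_pos (by simp)]
        exact pvGet_pvSet_same g lab hwf r c (by simpa using hp.1) (by simpa using hp.2) _
      · rw [if_neg hmem, if_neg (by simp [hpe, hmem])]
        exact pvGet_pvSet_ne lab pr pc r c hpe _

lemma pvFoldlSkip {α σ : Type} (p : α → Prop) [DecidablePred p] (F : σ → α → σ) :
    ∀ (l : List α) (st : σ),
      l.foldl (fun st x => if p x then st else F st x) st =
        (l.filter (fun x => ¬ p x)).foldl F st := by
  intro l
  induction l with
  | nil => intro st; rfl
  | cons x t ih =>
    intro st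
    by_cases hx : p x
    · simp [hx, ih]
    · simp [hx, ih]

lemma pvDedup_filter (p : Int → Prop) [DecidablePred p] (l : List Int) :
    (PySem.List.dedup l).filter (fun x => p x) = PySem.List.dedup (l.filter (fun x => p x)) := by
  rw [PySem.List.dedup_eq_ofList, PySem.List.dedup_eq_ofList]
  rw [PySem.Set.ofList_eq_foldl, PySem.Set.ofList_eq_foldl]
  suffices h : ∀ (acc : List Int),
      (l.foldl PySem.Set.add acc).filter (fun x => p x) =
        (l.filter (fun x => p x)).foldl PySem.Set.add (acc.filter (fun x => p x)) by
    simpa using h []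
  induction l with
  | nil => intro acc; simp
  | cons x t ih =>
    intro acc
    by_cases hx : p x
    · simp only [List.foldl_cons, List.filter_cons, hx, decide_true, if_pos]
      rw [ih]
      congr 1
      rw [PySem.Set.add_eq_ite, PySem.Set.add_eq_ite]
      by_cases hmem : x ∈ acc
      · rw [if_pos hmem, if_pos (List.mem_filter.mpr ⟨hmem, by simpa using hx⟩)]
      · rw [if_neg hmem, if_neg (fun hc => hmem (List.mem_filter.mp hc).1), List.filter_append]
        simp [hx]
    · simp only [List.foldl_cons, List.filter_cons, hx]
      rw [ih]
      congr 1
      rw [PySem.Set.add_eq_ite]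
      by_cases hmem : x ∈ acc
      · rw [if_pos hmem]
      · rw [if_neg hmem, List.filter_append]
        simp [hx]

-- canonical selection and output
def pvSel (g : List (List Int)) (bg : Int) : ℕ × Option (ℕ × ℕ × ℕ × ℕ) :=
  ((PySem.List.dedup ((pvCells g).map (fun p => pvGet g p.1 p.2))).filter
      (fun X => ¬ X = bg)).foldl
    (fun st X => (pvStream g X).foldl pvSelStep st) (0, none)

def pvOut (g : List (List Int)) (bg fill : Int) : List (List Int) :=
  match (pvSel g bg).2 with
  | none => (List.range (pvH g)).map (fun _ => PySem.List.pyRepeat [fill] ((pvW g : ℕ) : Int))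
  | some (r0, c0, r1, c1) =>
      (List.range (pvH g)).map (fun u =>
        (List.range (pvW g)).map (fun v =>
          if u ≤ r1 - r0 ∧ v ≤ c1 - c0 then pvGet g (r0 + u) (c0 + v) else fill))

-- every bbox in a stream is a valid in-bounds box
def pvValid (g : List (List Int)) (bb : ℕ × ℕ × ℕ × ℕ) : Prop :=
  bb.1 ≤ bb.2.2.1 ∧ bb.2.2.1 < pvH g ∧ bb.2.1 ≤ bb.2.2.2 ∧ bb.2.2.2 < pvW g

lemma pvFoldlMin_le (x : ℕ) : ∀ t : List ℕ, t.foldl min x ≤ x := by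
  intro t
  induction t generalizing x with
  | nil => simp
  | cons y s ih => exact le_trans (ih (min x y)) (by omega)

lemma pvFoldlMax_ge (x : ℕ) : ∀ t : List ℕ, x ≤ t.foldl max x := by
  intro t
  induction t generalizing x with
  | nil => simp
  | cons y s ih => exact le_trans (by omega) (ih (max x y))

lemma pvFoldlMax_lt (B : ℕ) : ∀ (t : List ℕ) (x : ℕ), x < B → (∀ y ∈ t, y < B) →
    t.foldl max x < B := by
  intro t
  induction t with
  | nil => intro x hx _; simpa using hx
  | cons y s ih =>
    intro x hx hall
    refine ih (max x y) (by have := hall y (by simp); omega) (fun z hz => hall z (by simp [hz]))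

lemma pvBbOf_valid (g : List (List Int)) (l : List (ℕ × ℕ)) (hne : l ≠ [])
    (hb : ∀ p ∈ l, p.1 < pvH g ∧ p.2 < pvW g) : pvValid g (pvBbOf l) := by
  match l with
  | [] => exact absurd rfl hne
  | x :: t =>
    have hx := hb x (by simp)
    refine ⟨?_, ?_, ?_, ?_⟩
    · exact le_trans (pvFoldlMin_le x.1 (t.map Prod.fst)) (pvFoldlMax_ge x.1 (t.map Prod.fst))
    · exact pvFoldlMax_lt (pvH g) (t.map Prod.fst) x.1 hx.1 (by
        intro y hy
        obtain ⟨q, hq, rfl⟩ := List.mem_map.mp hy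
        exact (hb q (by simp [hq])).1)
    · exact le_trans (pvFoldlMin_le x.2 (t.map Prod.snd)) (pvFoldlMax_ge x.2 (t.map Prod.snd))
    · exact pvFoldlMax_lt (pvW g) (t.map Prod.snd) x.2 hx.2 (by
        intro y hy
        obtain ⟨q, hq, rfl⟩ := List.mem_map.mp hy
        exact (hb q (by simp [hq])).2)

def pvSelOk (g : List (List Int)) (st : ℕ × Option (ℕ × ℕ × ℕ × ℕ)) : Prop :=
  st.2 = none ∨ ∃ bb, st.2 = some bb ∧ pvValid g bb

lemma pvSelStep_ok (g : List (List Int)) :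
    ∀ (l : List (ℕ × (ℕ × ℕ × ℕ × ℕ))) (st : ℕ × Option (ℕ × ℕ × ℕ × ℕ)),
      pvSelOk g st → (∀ e ∈ l, pvValid g e.2) → pvSelOk g (l.foldl pvSelStep st) := by
  intro l
  induction l with
  | nil => intro st h _; exact h
  | cons e t ih =>
    intro st h hall
    refine ih _ ?_ (fun x hx => hall x (by simp [hx]))
    rw [pvSelStep]
    by_cases hc : e.1 > st.1
    · rw [if_pos hc]
      exact Or.inr ⟨e.2, rfl, hall e (by simp)⟩
    · rw [if_neg hc]; exact h

lemma pvStream_valid (g : List (List Int)) (bg : Int) (X : Int) (hX : X ≠ bg) :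
    ∀ e ∈ pvStream g X, pvValid g e.2 := by
  have H := pvInv_all g bg (pvCells g).length le_rfl
  intro e he
  rw [pvStream] at he
  obtain ⟨j, hj, rfl⟩ := List.mem_map.mp he
  rw [List.mem_range] at hj
  have hfi := H.fIdxLt X hX j hj
  have hfilen : pvFIdx g (pvA g X (pvCells g).length).1 (j : Int) < (pvCells g).length := hfi
  have hspec := pvFIdx_spec g (pvA g X (pvCells g).length).1 (j : Int) hfilen
  have hmemcls : (pvCells g)[pvFIdx g (pvA g X (pvCells g).length).1 (j : Int)] ∈
      pvCls g (pvA g X (pvCells g).length).1 (j : Int) := by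
    rw [pvCls]
    exact List.mem_filter.mpr ⟨List.getElem_mem hfilen, by simpa using hspec⟩
  have hne : pvCls g (pvA g X (pvCells g).length).1 (j : Int) ≠ [] := by
    intro hnil
    rw [hnil] at hmemcls
    simp at hmemcls
  refine pvBbOf_valid g _ hne ?_
  intro p hp
  exact (pvCells_mem g p).mp (List.mem_filter.mp hp).1

lemma pvSel_ok (g : List (List Int)) (bg : Int) : pvSelOk g (pvSel g bg) := by
  rw [pvSel]
  have : ∀ (keys : List Int) (st : ℕ × Option (ℕ × ℕ × ℕ × ℕ)),
      (∀ X ∈ keys, X ≠ bg) → pvSelOk g st →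
      pvSelOk g (keys.foldl (fun st X => (pvStream g X).foldl pvSelStep st) st) := by
    intro keys
    induction keys with
    | nil => intro st _ h; exact h
    | cons X t ih =>
      intro st hk h
      refine ih _ (fun Y hY => hk Y (by simp [hY])) ?_
      exact pvSelStep_ok g _ _ h (pvStream_valid g bg X (hk X (by simp)))
  refine this _ _ ?_ (Or.inl rfl)
  intro X hX
  have := List.mem_filter.mp hX
  simpa using this.2

-- ---------- counts dict facts ----------
def pvCounts (g : List (List Int)) : PySem.Dict Int Int :=
  g.foldl (fun d row => row.foldl
    (fun (d : PySem.Dict Int Int) v => d.insert v (d.getD v 0 + 1)) d) PySem.Dict.empty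

lemma pvCounts_nodup (g : List (List Int)) : (pvCounts g).keys.Nodup := by
  rw [pvCounts]
  suffices h : ∀ (rows : List (List Int)) (d : PySem.Dict Int Int), d.keys.Nodup →
      (rows.foldl (fun d row => row.foldl
        (fun (d : PySem.Dict Int Int) v => d.insert v (d.getD v 0 + 1)) d) d).keys.Nodup by
    exact h g PySem.Dict.empty (by simp)
  intro rows
  induction rows with
  | nil => intro d h; exact h
  | cons row t ih =>
    intro d h
    exact ih _ (PySem.Dict.nodup_keys_foldl_insert row _ d h)

lemma pvCounts_pos (g : List (List Int)) : ∀ kv ∈ (pvCounts g).items, 1 ≤ kv.2 := by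
  rw [pvCounts]
  suffices h : ∀ (rows : List (List Int)) (d : PySem.Dict Int Int),
      (∀ kv ∈ d.items, 1 ≤ kv.2) →
      ∀ kv ∈ (rows.foldl (fun d row => row.foldl
        (fun (d : PySem.Dict Int Int) v => d.insert v (d.getD v 0 + 1)) d) d).items, 1 ≤ kv.2 by
    refine h g PySem.Dict.empty ?_
    intro kv hkv
    have he : (PySem.Dict.empty : PySem.Dict Int Int).items = [] := rfl
    rw [he] at hkv
    simp at hkv
  have hrow : ∀ (row : List Int) (d : PySem.Dict Int Int),
      (∀ kv ∈ d.items, 1 ≤ kv.2) →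
      ∀ kv ∈ (row.foldl (fun (d : PySem.Dict Int Int) v => d.insert v (d.getD v 0 + 1)) d).items,
        1 ≤ kv.2 := by
    intro row
    induction row with
    | nil => intro d h; exact h
    | cons v t ih =>
      intro d h
      refine ih _ ?_
      intro kv hkv
      rcases (PySem.Dict.mem_items_insert _ _ _ _).mp hkv with hkv | ⟨hkv, _⟩
      · subst hkv
        have hge : 0 ≤ d.getD v 0 := by
          rcases hv : d.get? v with _ | u
          · simp [PySem.Dict.getD, hv]
          · have := h (v, u) (PySem.Dict.mem_items_of_get?_eq_some _ hv)
            simp only [PySem.Dict.getD, hv]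
            simpa using by omega
        simp only []
        omega
      · exact h kv hkv
  intro rows
  induction rows with
  | nil => intro d h; exact h
  | cons row t ih =>
    intro d h
    exact ih _ (hrow row d h)

-- ---------- port B equals the canonical output ----------
def pvAltTail (g : List (List Int)) (bg fill : Int) : List (List Int) :=
  let h := g.length
  let w := g.headI.length
  let cells := (List.range h).flatMap (fun i => (List.range w).map (fun j => (i, j)))
  let final :=
    cells.foldl
      (fun (acc : PySem.Set (ℕ × ℕ) × PySem.Dict Int (List (ℕ × (ℕ × ℕ × ℕ × ℕ)))) cell =>
        let col := cellAt g cell.1 cell.2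
        if col = bg ∨ (cell.1, cell.2) ∈ acc.1 then acc else
        let res := grow g h w col (h * w + 1)
            (PySem.Set.add acc.1 (cell.1, cell.2), [(cell.1, cell.2)], [(cell.1, cell.2)])
        let members := res.2
        let box : ℕ × ℕ × ℕ × ℕ :=
          (((PySem.List.min? (members.map Prod.fst) (fun a => a)).getD 0),
           ((PySem.List.min? (members.map Prod.snd) (fun a => a)).getD 0),
           ((PySem.List.max? (members.map Prod.fst) (fun a => a)).getD 0),
           ((PySem.List.max? (members.map Prod.snd) (fun a => a)).getD 0))
        (res.1, acc.2.insert col (acc.2.getD col [] ++ [(members.length, box)])))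
      ((PySem.Set.empty : PySem.Set (ℕ × ℕ)), PySem.Dict.empty)
  let winner :=
    final.2.values.foldl (fun cur entries =>
      entries.foldl (fun (cur : ℕ × Option (ℕ × ℕ × ℕ × ℕ)) it =>
        if it.1 > cur.1 then (it.1, some it.2) else cur) cur) (0, none)
  match winner.2 with
  | none => (List.range h).map (fun _ => PySem.List.pyRepeat [fill] (w : Int))
  | some (r0, c0, r1, c1) =>
      (List.range h).map (fun u =>
        (List.range w).map (fun v =>
          if u ≤ r1 - r0 ∧ v ≤ c1 - c0 then cellAt g (r0 + u) (c0 + v) else fill))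

lemma portB_decompose (g : List (List Int)) (fill : Int) :
    move_largest_nonbg_to_topleft_alt g fill =
      pvAltTail g (PySem.List.maxD (PySem.Dict.counter (g.flatMap (fun row => row))).keys
        (fun v => (PySem.Dict.counter (g.flatMap (fun row => row))).getD v 0) 0) fill := rfl

lemma portB_tail_eq (g : List (List Int)) (bg fill : Int) :
    pvAltTail g bg fill = pvOut g bg fill := by
  have H := pvInv_all g bg (pvCells g).length le_rfl
  have hscan := scanB_eq g bg
  have hcomm : ((pvCells g).filter (fun p => ¬ pvGet g p.1 p.2 = bg)).map
      (fun p => pvGet g p.1 p.2) =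
      ((pvCells g).map (fun p => pvGet g p.1 p.2)).filter (fun X => ¬ X = bg) := by
    rw [List.filter_map]
    rfl
  have hkeys : (pvB g bg (pvCells g).length).2.keys =
      (PySem.List.dedup ((pvCells g).map (fun p => pvGet g p.1 p.2))).filter
        (fun X => ¬ X = bg) := by
    rw [H.keysEq, pvPreL, List.take_length, hcomm, ← pvDedup_filter]
  have hknd : (pvB g bg (pvCells g).length).2.keys.Nodup := by
    rw [H.keysEq]
    rw [PySem.List.dedup_eq_ofList]
    exact PySem.Set.nodup_ofList _
  have hsel : (pvB g bg (pvCells g).length).2.values.foldl (fun cur entries =>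
      entries.foldl (fun (cur : ℕ × Option (ℕ × ℕ × ℕ × ℕ)) it =>
        if it.1 > cur.1 then (it.1, some it.2) else cur) cur) (0, none) = pvSel g bg := by
    rw [PySem.Dict.values_eq_map_keys _ hknd []]
    rw [List.foldl_map]
    rw [pvSel, ← hkeys]
    refine PySem.List.foldl_congr_mem _ _ _ _ ?_
    intro st X hX
    have hXbg : X ≠ bg := by
      rw [hkeys] at hX
      have := List.mem_filter.mp hX
      simpa using this.2
    rw [H.compsEq X hXbg]
    rfl
  rw [pvAltTail, pvOut]
  simp only [hscan, hsel]
  rfl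
-- ---------- port A equals the canonical selection ----------
def pvColorIns (g : List (List Int)) (d : PySem.Dict Int Bool) (p : ℕ × ℕ) :
    PySem.Dict Int Bool :=
  d.insert (pvGet g p.1 p.2) true

lemma portA_bbox (g : List (List Int)) :
    largest_nonbg_component_bbox g = (pvSel g (most_common_color g)).2 := by
  have H := pvInv_all g (most_common_color g) (pvCells g).length le_rfl
  have hcol1 : (List.range (pvDims g).1).foldl (fun d r =>
      (List.range (pvDims g).2).foldl
        (fun (d : PySem.Dict Int Bool) c => d.insert (pvGet g r c) true) d)
      PySem.Dict.empty =
      (List.range (pvH g)).foldl (fun d r =>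
        (List.range (pvW g)).foldl (fun d c => pvColorIns g d (r, c)) d)
        PySem.Dict.empty := rfl
  have hcol2 : (List.range (pvH g)).foldl (fun d r =>
      (List.range (pvW g)).foldl (fun d c => pvColorIns g d (r, c)) d)
      PySem.Dict.empty = (pvCells g).foldl (pvColorIns g) PySem.Dict.empty := by
    rw [foldl_nested (pvColorIns g) (pvH g) (pvW g)]
    rfl
  have hcolkeys : ((pvCells g).foldl (pvColorIns g) PySem.Dict.empty).keys =
      PySem.List.dedup ((pvCells g).map (fun p => pvGet g p.1 p.2)) := by
    have hunf : (pvCells g).foldl (pvColorIns g) PySem.Dict.empty =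
        (pvCells g).foldl (fun (d : PySem.Dict Int Bool) p =>
          d.insert (pvGet g p.1 p.2) true) PySem.Dict.empty := rfl
    rw [hunf, PySem.Dict.keys_foldl_insert_key (pvCells g) (fun p => pvGet g p.1 p.2)
      (fun _ _ => true) PySem.Dict.empty]
    rw [PySem.Dict.keys_empty, PySem.Set.update_nil_left, PySem.List.dedup_eq_ofList]
  have hbody : ∀ (st : ℕ × Option (ℕ × ℕ × ℕ × ℕ)) (X : Int), X ≠ most_common_color g →
      (let labels := cc_label_color g X
       let sb :=
         (List.range (pvDims g).1).foldl (fun sb r =>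
           (List.range (pvDims g).2).foldl
             (fun (sb : PySem.Dict Int ℕ × PySem.Dict Int (ℕ × ℕ × ℕ × ℕ)) c =>
               let cid := pvGet labels r c
               if cid ≥ 0 then
                 (sb.1.insert cid (sb.1.getD cid 0 + 1),
                  match sb.2.get? cid with
                  | none => sb.2.insert cid (r, c, r, c)
                  | some (r0, c0, r1, c1) =>
                      sb.2.insert cid (min r0 r, min c0 c, max r1 r, max c1 c))
               else sb) sb) (PySem.Dict.empty, PySem.Dict.empty)
       sb.1.items.foldl (fun (st : ℕ × Option (ℕ × ℕ × ℕ × ℕ)) cs =>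
         if cs.2 > st.1 then (cs.2, some (sb.2.getD cs.1 (0, 0, 0, 0)))
         else st) st) = (pvStream g X).foldl pvSelStep st := by
    intro st X hX
    have hlab := cc_label_color_eq g X
    have hsb : (List.range (pvDims g).1).foldl (fun sb r =>
        (List.range (pvDims g).2).foldl
          (fun (sb : PySem.Dict Int ℕ × PySem.Dict Int (ℕ × ℕ × ℕ × ℕ)) c =>
            let cid := pvGet (cc_label_color g X) r c
            if cid ≥ 0 then
              (sb.1.insert cid (sb.1.getD cid 0 + 1),
               match sb.2.get? cid with
               | none => sb.2.insert cid (r, c, r, c)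
               | some (r0, c0, r1, c1) =>
                   sb.2.insert cid (min r0 r, min c0 c, max r1 r, max c1 c))
            else sb) sb) (PySem.Dict.empty, PySem.Dict.empty) =
        (pvCells g).foldl (pvScanStep (cc_label_color g X))
          (PySem.Dict.empty, PySem.Dict.empty) := by
      have h1 : (List.range (pvDims g).1).foldl (fun sb r =>
          (List.range (pvDims g).2).foldl
            (fun (sb : PySem.Dict Int ℕ × PySem.Dict Int (ℕ × ℕ × ℕ × ℕ)) c =>
              let cid := pvGet (cc_label_color g X) r c
              if cid ≥ 0 then
                (sb.1.insert cid (sb.1.getD cid 0 + 1),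
                 match sb.2.get? cid with
                 | none => sb.2.insert cid (r, c, r, c)
                 | some (r0, c0, r1, c1) =>
                     sb.2.insert cid (min r0 r, min c0 c, max r1 r, max c1 c))
              else sb) sb) (PySem.Dict.empty, PySem.Dict.empty) =
          (List.range (pvH g)).foldl (fun sb r =>
            (List.range (pvW g)).foldl
              (fun sb c => pvScanStep (cc_label_color g X) sb (r, c)) sb)
            (PySem.Dict.empty, PySem.Dict.empty) := rfl
      rw [h1, foldl_nested (pvScanStep (cc_label_color g X)) (pvH g) (pvW g)]
      rfl
    simp only [hsb]
    have hN : (((pvA g X (pvCells g).length).2.toNat : ℕ) : Int) =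
        (pvA g X (pvCells g).length).2 := Int.toNat_of_nonneg (H.nnA X hX)
    obtain ⟨hsz, hbb⟩ := rescan g (cc_label_color g X) (pvA g X (pvCells g).length).2.toNat
      (by rw [hlab]; exact H.wfA X hX)
      (by
        intro r c hr hc
        rw [hlab]
        rcases H.valsA X hX r c hr hc with h | ⟨h1, h2⟩
        · exact Or.inl h
        · exact Or.inr ⟨h1, by omega⟩)
      (by
        intro j hj
        have hfidxlab : pvFIdx g (cc_label_color g X) (j : Int) =
            pvFIdx g (pvA g X (pvCells g).length).1 (j : Int) := by rw [hlab]
        rw [hfidxlab]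
        exact H.fIdxLt X hX j hj)
      (by
        intro i j hij hj
        have h1 : pvFIdx g (cc_label_color g X) (i : Int) =
            pvFIdx g (pvA g X (pvCells g).length).1 (i : Int) := by rw [hlab]
        have h2 : pvFIdx g (cc_label_color g X) (j : Int) =
            pvFIdx g (pvA g X (pvCells g).length).1 (j : Int) := by rw [hlab]
        rw [h1, h2]
        exact H.fIdxMono X hX i j hij hj)
    rw [hsz, List.foldl_map]
    rw [PySem.List.foldl_congr_mem (l := List.range (pvA g X (pvCells g).length).2.toNat)
      (f := fun st (j : ℕ) =>
        if (pvCls g (cc_label_color g X) (j : Int)).length > st.1 then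
          ((pvCls g (cc_label_color g X) (j : Int)).length,
           some (((pvCells g).foldl (pvScanStep (cc_label_color g X))
             (PySem.Dict.empty, PySem.Dict.empty)).2.getD ((j : Int)) (0, 0, 0, 0)))
        else st)
      (g := fun st (j : ℕ) => pvSelStep st (pvEntry g (cc_label_color g X) (j : Int)))
      st ?_]
    · rw [← List.foldl_map (f := fun j : ℕ => pvEntry g (cc_label_color g X) (j : Int))
        (g := pvSelStep)]
      rw [pvStream]
      congr 1
      refine List.map_congr_left ?_
      intro j _
      rw [hlab]
    · intro acc j hj
      rw [List.mem_range] at hj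
      simp only [hbb j hj]
      rfl
  have hport : largest_nonbg_component_bbox g =
      (((pvCells g).foldl (pvColorIns g) PySem.Dict.empty).keys.foldl
        (fun (st : ℕ × Option (ℕ × ℕ × ℕ × ℕ)) color =>
          if color = most_common_color g then st else
          (let labels := cc_label_color g color
           let sb :=
             (List.range (pvDims g).1).foldl (fun sb r =>
               (List.range (pvDims g).2).foldl
                 (fun (sb : PySem.Dict Int ℕ × PySem.Dict Int (ℕ × ℕ × ℕ × ℕ)) c =>
                   let cid := pvGet labels r c
                   if cid ≥ 0 then
                     (sb.1.insert cid (sb.1.getD cid 0 + 1),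
                      match sb.2.get? cid with
                      | none => sb.2.insert cid (r, c, r, c)
                      | some (r0, c0, r1, c1) =>
                          sb.2.insert cid (min r0 r, min c0 c, max r1 r, max c1 c))
                   else sb) sb) (PySem.Dict.empty, PySem.Dict.empty)
           sb.1.items.foldl (fun (st : ℕ × Option (ℕ × ℕ × ℕ × ℕ)) cs =>
             if cs.2 > st.1 then (cs.2, some (sb.2.getD cs.1 (0, 0, 0, 0)))
             else st) st)) (0, none)).2 := by
    rw [largest_nonbg_component_bbox]
    rw [hcol1, hcol2]
  rw [hport]
  rw [pvFoldlSkip (fun X => X = most_common_color g)]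
  rw [PySem.List.foldl_congr_mem _ _ _ _ (fun acc X hX => hbody acc X (by
    have := List.mem_filter.mp hX
    simpa using this.2))]
  rw [pvSel, hcolkeys]
-- ---------- crop-and-paste equals the direct comprehension ----------
lemma pvGet_fillgrid (g : List (List Int)) (fill : Int) (i j : ℕ) (hi : i < pvH g)
    (hj : j < pvW g) :
    pvGet ((List.range (pvH g)).map (fun _ =>
      (List.range (pvW g)).map (fun _ => fill))) i j = fill := by
  have h1 : ((List.range (pvH g)).map (fun _ =>
      (List.range (pvW g)).map (fun _ => fill))).getD i [] =
      (List.range (pvW g)).map (fun _ => fill) := by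
    rw [List.getD_eq_getElem?_getD, List.getElem?_eq_getElem (by simpa using hi),
      Option.getD_some, List.getElem_map]
  rw [pvGet, h1, List.getD_eq_getElem?_getD,
    List.getElem?_eq_getElem (by simpa using hj), Option.getD_some, List.getElem_map]

lemma pasteEq (g : List (List Int)) (fill : Int) (r0 c0 r1 c1 : ℕ)
    (hPre : ∀ row ∈ g, g.headI.length ≤ row.length)
    (hv : pvValid g (r0, c0, r1, c1)) :
    (let cropped := crop_bbox g (r0, c0, r1, c1)
     let ch := (pvDims cropped).1
     let cw := (pvDims cropped).2
     let h := (pvDims g).1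
     let w := (pvDims g).2
     let out := (List.range h).map (fun _ => (List.range w).map (fun _ => fill))
     (List.range (min ch h)).foldl (fun out r =>
       (List.range (min cw w)).foldl (fun out c => pvSet out r c (pvGet cropped r c)) out) out) =
    (List.range (pvH g)).map (fun u =>
      (List.range (pvW g)).map (fun v =>
        if u ≤ r1 - r0 ∧ v ≤ c1 - c0 then pvGet g (r0 + u) (c0 + v) else fill)) := by
  obtain ⟨hv1, hv2, hv3, hv4⟩ := hv
  simp only [] at hv1 hv2 hv3 hv4
  have hr01 : r0 ≤ r1 := hv1
  have hr1h : r1 < pvH g := hv2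
  have hc01 : c0 ≤ c1 := hv3
  have hc1w : c1 < pvW g := hv4
  have hcrop : crop_bbox g (r0, c0, r1, c1) =
      (List.range' r0 (r1 + 1 - r0)).map
        (fun r => ((g.getD r []).drop c0).take (c1 + 1 - c0)) := by
    rw [crop_bbox]
    rw [pvFoldlAppendMap]
    simp
  have hch : (pvDims (crop_bbox g (r0, c0, r1, c1))).1 = r1 + 1 - r0 := by
    simp [pvDims, hcrop]
  have hrow0 : g.headI.length ≤ (g.getD r0 []).length := by
    have hr0h : r0 < g.length := by
      have : pvH g = g.length := rfl
      omega
    have : g.getD r0 [] = g[r0] := by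
      simp [List.getD_eq_getElem?_getD, List.getElem?_eq_getElem hr0h]
    rw [this]
    exact hPre _ (List.getElem_mem hr0h)
  have hcw : (pvDims (crop_bbox g (r0, c0, r1, c1))).2 = c1 + 1 - c0 := by
    rw [hcrop, pvDims]
    have hn : r1 + 1 - r0 = (r1 - r0) + 1 := by omega
    rw [hn, List.range'_succ, List.map_cons]
    simp only [List.headI_cons]
    rw [List.length_take, List.length_drop]
    have : pvW g = g.headI.length := rfl
    omega
  have hminh : min (r1 + 1 - r0) (pvDims g).1 = r1 + 1 - r0 := by
    have : (pvDims g).1 = pvH g := rfl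
    omega
  have hminw : min (c1 + 1 - c0) (pvDims g).2 = c1 + 1 - c0 := by
    have : (pvDims g).2 = pvW g := rfl
    omega
  have hcg : ∀ r c, r < r1 + 1 - r0 → c < c1 + 1 - c0 →
      pvGet (crop_bbox g (r0, c0, r1, c1)) r c = pvGet g (r0 + r) (c0 + c) := by
    intro r c hr hc
    have hrlen : r < ((List.range' r0 (r1 + 1 - r0)).map
        (fun r => ((g.getD r []).drop c0).take (c1 + 1 - c0))).length := by
      simpa using hr
    have hrow : (crop_bbox g (r0, c0, r1, c1)).getD r [] =
        ((g.getD (r0 + r) []).drop c0).take (c1 + 1 - c0) := by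
      rw [hcrop]
      rw [List.getD_eq_getElem?_getD, List.getElem?_eq_getElem hrlen, Option.getD_some]
      rw [List.getElem_map, List.getElem_range']
      simp
    rw [pvGet, hrow, pvGet]
    simp only [List.getD_eq_getElem?_getD, List.getElem?_take, if_pos hc, List.getElem?_drop]
  have hbridge : (List.range (min (pvDims (crop_bbox g (r0, c0, r1, c1))).1 (pvDims g).1)).foldl
      (fun out r => (List.range (min (pvDims (crop_bbox g (r0, c0, r1, c1))).2 (pvDims g).2)).foldl
        (fun out c => pvSet out r c (pvGet (crop_bbox g (r0, c0, r1, c1)) r c)) out)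
      ((List.range (pvDims g).1).map (fun _ => (List.range (pvDims g).2).map (fun _ => fill))) =
      ((List.range (r1 + 1 - r0)).flatMap (fun r =>
        (List.range (c1 + 1 - c0)).map (fun c => (r, c)))).foldl
        (fun out p => pvSet out p.1 p.2 (pvGet (crop_bbox g (r0, c0, r1, c1)) p.1 p.2))
        ((List.range (pvH g)).map (fun _ => (List.range (pvW g)).map (fun _ => fill))) := by
    rw [hch, hcw, hminh, hminw]
    rw [foldl_nested (fun out p => pvSet out p.1 p.2 (pvGet (crop_bbox g (r0, c0, r1, c1)) p.1 p.2))
      (r1 + 1 - r0) (c1 + 1 - c0)]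
    rfl
  have hwf0 : pvWf g ((List.range (pvH g)).map (fun _ =>
      (List.range (pvW g)).map (fun _ => fill))) := by
    constructor
    · simp [pvH]
    · intro row hrow
      obtain ⟨_, _, rfl⟩ := List.mem_map.mp hrow
      simp [pvW]
  have hbnd : ∀ p ∈ (List.range (r1 + 1 - r0)).flatMap (fun r =>
      (List.range (c1 + 1 - c0)).map (fun c => (r, c))), p.1 < pvH g ∧ p.2 < pvW g := by
    intro p hp
    have := (pvGridMem (r1 + 1 - r0) (c1 + 1 - c0) p).mp hp
    omega
  have hget := pvGet_foldSetF g (fun p => pvGet (crop_bbox g (r0, c0, r1, c1)) p.1 p.2)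
    ((List.range (r1 + 1 - r0)).flatMap (fun r =>
      (List.range (c1 + 1 - c0)).map (fun c => (r, c)))) hbnd
    ((List.range (pvH g)).map (fun _ => (List.range (pvW g)).map (fun _ => fill))) hwf0
  have hwfF := pvWf_foldSetF g (fun p => pvGet (crop_bbox g (r0, c0, r1, c1)) p.1 p.2)
    ((List.range (r1 + 1 - r0)).flatMap (fun r =>
      (List.range (c1 + 1 - c0)).map (fun c => (r, c))))
    ((List.range (pvH g)).map (fun _ => (List.range (pvW g)).map (fun _ => fill))) hwf0
  simp only []
  rw [hbridge]
  set final := ((List.range (r1 + 1 - r0)).flatMap (fun r =>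
      (List.range (c1 + 1 - c0)).map (fun c => (r, c)))).foldl
      (fun out p => pvSet out p.1 p.2 (pvGet (crop_bbox g (r0, c0, r1, c1)) p.1 p.2))
      ((List.range (pvH g)).map (fun _ => (List.range (pvW g)).map (fun _ => fill))) with hfinal
  refine List.ext_getElem ?_ ?_
  · rw [hwfF.1]
    simp [pvH]
  · intro i h1 h2
    have hih : i < pvH g := by simpa using h2
    refine List.ext_getElem ?_ ?_
    · have : final[i] ∈ final := List.getElem_mem h1
      rw [hwfF.2 _ this]
      simp [pvW]
    · intro jj hj1 hj2
      have hjw : jj < pvW g := by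
        have : final[i] ∈ final := List.getElem_mem h1
        have := hwfF.2 _ this
        omega
      have hpv : final[i][jj] = pvGet final i jj := by
        simp only [pvGet, List.getD_eq_getElem?_getD]
        rw [List.getElem?_eq_getElem h1, Option.getD_some,
          List.getElem?_eq_getElem hj1, Option.getD_some]
      rw [hpv, hget i jj]
      have hrhs : ((List.range (pvH g)).map (fun u =>
          (List.range (pvW g)).map (fun v =>
            if u ≤ r1 - r0 ∧ v ≤ c1 - c0 then pvGet g (r0 + u) (c0 + v)
            else fill)))[i][jj] =
          (if i ≤ r1 - r0 ∧ jj ≤ c1 - c0 then pvGet g (r0 + i) (c0 + jj) else fill) := by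
        simp only [List.getElem_map, List.getElem_range]
      rw [hrhs]
      by_cases hc : (i, jj) ∈ (List.range (r1 + 1 - r0)).flatMap (fun r =>
          (List.range (c1 + 1 - c0)).map (fun c => (r, c)))
      · have hcc := (pvGridMem _ _ (i, jj)).mp hc
        simp only [] at hcc
        rw [if_pos hc, if_pos (by omega)]
        exact hcg i jj (by omega) (by omega)
      · have hcc : ¬ (i < r1 + 1 - r0 ∧ jj < c1 + 1 - c0) := by
          intro hcc
          exact hc ((pvGridMem _ _ (i, jj)).mpr (by omega))
        rw [if_neg hc, if_neg (by omega)]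
        exact pvGet_fillgrid g fill i jj hih hjw

-- ---------- bg agreement and fill-row bridge ----------
lemma counter_flat_eq (g : List (List Int)) :
    PySem.Dict.counter (g.flatMap (fun row => row)) = pvCounts g := by
  rw [← PySem.Dict.foldl_insert_getD_add_one_eq_counter, List.foldl_flatMap]
  rfl

lemma maxD_cons_cons (d : PySem.Dict Int Int) (b x : Int) (s : List Int) :
    PySem.List.maxD (b :: x :: s) (fun v => d.getD v 0) 0 =
      PySem.List.maxD ((if d.getD x 0 > d.getD b 0 then x else b) :: s)
        (fun v => d.getD v 0) 0 := by
  by_cases h : d.getD x 0 > d.getD b 0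
  · rw [if_pos h]
    unfold PySem.List.maxD PySem.List.max?
    simp only [List.foldl_cons]
    refine congrArg (fun o : Option Int => o.getD 0) (congrArg (fun o => List.foldl _ o s) ?_)
    show (if d.getD b 0 < d.getD x 0 then some x else some b) = some x
    exact if_pos h
  · rw [if_neg h]
    unfold PySem.List.maxD PySem.List.max?
    simp only [List.foldl_cons]
    refine congrArg (fun o : Option Int => o.getD 0) (congrArg (fun o => List.foldl _ o s) ?_)
    show (if d.getD b 0 < d.getD x 0 then some x else some b) = some b
    exact if_neg h

lemma maxD_fold (d : PySem.Dict Int Int) : ∀ (ks : List Int) (k : Int),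
    PySem.List.maxD (k :: ks) (fun v => d.getD v 0) 0 =
      ks.foldl (fun best k' => if d.getD k' 0 > d.getD best 0 then k' else best) k := by
  intro ks
  induction ks with
  | nil => intro k; rfl
  | cons x s ih =>
    intro k
    rw [maxD_cons_cons, ih, List.foldl_cons]

lemma maxD_keys_eq (d : PySem.Dict Int Int) :
    PySem.List.maxD d.keys (fun v => d.getD v 0) 0 =
      (match d.keys with
       | [] => (0 : Int)
       | k :: ks => ks.foldl (fun best k' =>
           if d.getD k' 0 > d.getD best 0 then k' else best) k) := by
  rcases h : d.keys with _ | ⟨k, ks⟩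
  · rfl
  · exact maxD_fold d ks k

lemma bgB_eq (g : List (List Int)) :
    PySem.List.maxD (PySem.Dict.counter (g.flatMap (fun row => row))).keys
      (fun v => (PySem.Dict.counter (g.flatMap (fun row => row))).getD v 0) 0 =
    most_common_color g := by
  rw [counter_flat_eq, maxD_keys_eq,
    ← argmax_eq (pvCounts g) (pvCounts_nodup g) (pvCounts_pos g)]
  rfl

lemma pyRow_eq (w : ℕ) (fill : Int) :
    PySem.List.pyRepeat [fill] ((w : ℕ) : Int) = (List.range w).map (fun _ => fill) := by
  rw [PySem.List.pyRepeat_singleton]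
  have h1 : ((w : ℕ) : Int).toNat = w := by omega
  rw [h1]
  clear h1
  induction w with
  | zero => rfl
  | succ n ih => rw [List.range_succ, List.map_append, List.replicate_succ']; rw [ih]; rfl

-- ===== VERDICT (by name: the statement is the Claim_ definition above) =====
theorem move_largest_nonbg_to_topleft_spec : Claim_equal_move_largest_nonbg_to_topleft := by
  intro g fill _ hPre
  show move_largest_nonbg_to_topleft g fill = move_largest_nonbg_to_topleft_alt g fill
  have hB : move_largest_nonbg_to_topleft_alt g fill = pvOut g (most_common_color g) fill := by
    rw [portB_decompose, bgB_eq, portB_tail_eq]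
  have hA : move_largest_nonbg_to_topleft g fill = pvOut g (most_common_color g) fill := by
    have hsel := portA_bbox g
    have hok := pvSel_ok g (most_common_color g)
    unfold move_largest_nonbg_to_topleft pvOut
    rcases hds : (pvSel g (most_common_color g)).2 with _ | ⟨r0, c0, r1, c1⟩
    · simp only [hsel, hds]
      refine List.map_congr_left ?_
      intro _ _
      exact (pyRow_eq (pvW g) fill).symm
    · simp only [hsel, hds]
      have hval : pvValid g (r0, c0, r1, c1) := by
        rcases hok with hok | ⟨bb, hbb, hval⟩
        · rw [hok] at hds; exact absurd hds (by simp)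
        · rw [hbb] at hds
          have : bb = (r0, c0, r1, c1) := by simpa using hds
          rw [← this]
          exact hval
      exact pasteEq g fill r0 c0 r1 c1 hPre hval
  rw [hA, hB]
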